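-- pv_equiv track=rewrite | github.com/TumbadoBoy0604/5-Busquedas-Adversario | conect4.py | contar_conectados
-- ===== SOURCE A (Python) =====
-- def contar_conectados(estado, jugador, n):
--     """
--     Cuenta cuántas líneas de 'n' fichas conectadas tiene el jugador
--     con espacios para completar una línea de 4.
--     """
--     count = 0
--
--     # Buscar horizontales
--     for fila in range(6):
--         for col in range(7-n+1):
--             if all(estado[fila*7 + col+i] == jugador for i in range(n)):
--                 # Verificar si hay espacio para completar 4
--                 if n < 4:
--                     espacios_libres = False
--                     # Verificar espacios a la izquierda
--                     if col > 0 and estado[fila*7 + col-1] == 0: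
--                         espacios_libres = True
--                     # Verificar espacios a la derecha
--                     if col+n < 7 and estado[fila*7 + col+n] == 0:
--                         espacios_libres = True
--
--                     if espacios_libres:
--                         count += 1
--                 else:
--                     count += 1
--
--     # Buscar verticales
--     for col in range(7):
--         for fila in range(6-n+1):
--             if all(estado[(fila+i)*7 + col] == jugador for i in range(n)):
--                 # Para verticales, solo verificamos si hay espacio arriba
--                 if n < 4 and fila > 0 and estado[(fila-1)*7 + col] == 0:
--                     count += 1
--                 elif n == 4:
--                     count += 1
--
--     # Buscar diagonales ascendentes
--     for fila in range(n-1, 6):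
--         for col in range(7-n+1):
--             if all(estado[(fila-i)*7 + col+i] == jugador for i in range(n)):
--                 if n < 4:
--                     espacios_libres = False
--                     # Verificar espacio abajo-izquierda
--                     if col > 0 and fila < 5 and estado[(fila+1)*7 + col-1] == 0:
--                         espacios_libres = True
--                     # Verificar espacio arriba-derecha
--                     if col+n < 7 and fila-(n) >= 0 and estado[(fila-(n))*7 + col+n] == 0:
--                         espacios_libres = True
--
--                     if espacios_libres:
--                         count += 1
--                 else:
--                     count += 1
--
--     # Buscar diagonales descendentes
--     for fila in range(6-n+1):
--         for col in range(7-n+1):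
--             if all(estado[(fila+i)*7 + col+i] == jugador for i in range(n)):
--                 if n < 4:
--                     espacios_libres = False
--                     # Verificar espacio arriba-izquierda
--                     if col > 0 and fila > 0 and estado[(fila-1)*7 + col-1] == 0:
--                         espacios_libres = True
--                     # Verificar espacio abajo-derecha
--                     if col+n < 7 and fila+n < 6 and estado[(fila+n)*7 + col+n] == 0:
--                         espacios_libres = True
--
--                     if espacios_libres:
--                         count += 1
--                 else:
--                     count += 1
--
--     return count
-- ===== SOURCE B (Python) =====
-- def contar_conectados(estado, jugador, n):
--     """
--     Cuenta cuantas lineas de 'n' fichas conectadas tiene el jugador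
--     con espacios para completar una linea de 4.
--     Dynamic programming: precompute, for every cell, the length of the run
--     of fichas del jugador that ENDS at that cell in each of the four
--     directions; then a single pass over end cells counts the lines.
--     """
--     if n > 7:
--         return 0  # no line longer than 7 fits on the 6x7 board
--     filas = [[estado[r * 7 + c] for c in range(7)] for r in range(6)]
--     Z = [0] * 7
--     izq = []   # run ending at (r,c) coming from the left
--     arr = []   # run ending at (r,c) coming from above
--     dsc = []   # run ending at (r,c) along the (+1,+1) diagonal
--     for r in range(6):
--         pa = arr[r - 1] if r > 0 else Z
--         pd = dsc[r - 1] if r > 0 else Z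
--         fi, fa, fd = [], [], []
--         for c in range(7):
--             if filas[r][c] == jugador:
--                 fi.append((fi[c - 1] if c > 0 else 0) + 1)
--                 fa.append(pa[c] + 1)
--                 fd.append((pd[c - 1] if c > 0 and r > 0 else 0) + 1)
--             else:
--                 fi.append(0)
--                 fa.append(0)
--                 fd.append(0)
--         izq.append(fi)
--         arr.append(fa)
--         dsc.append(fd)
--     asc = []   # run ending at (r,c) along the (-1,+1) diagonal; built bottom-up
--     nx = Z
--     for r in range(5, -1, -1):
--         fs = []
--         for c in range(7):
--             if filas[r][c] == jugador:
--                 fs.append((nx[c - 1] if c > 0 and r < 5 else 0) + 1)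
--             else:
--                 fs.append(0)
--         asc.insert(0, fs)
--         nx = fs
--
--     def vacia(r, c):
--         return 0 <= r < 6 and 0 <= c < 7 and filas[r][c] == 0
--
--     cuenta = 0
--     for r in range(6):
--         for c in range(7):
--             if izq[r][c] >= n and (n >= 4 or vacia(r, c - n) or vacia(r, c + 1)):
--                 cuenta += 1
--             if arr[r][c] >= n and (n >= 4 or vacia(r - n, c)):
--                 cuenta += 1
--             if asc[r][c] >= n and (n >= 4 or vacia(r + n, c - n) or vacia(r - 1, c + 1)):
--                 cuenta += 1
--             if dsc[r][c] >= n and (n >= 4 or vacia(r - n, c - n) or vacia(r + 1, c + 1)):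
--                 cuenta += 1
--     return cuenta
-- ===== Notes on version B (the rewrite author's own statement) =====
-- stated objective: alternative
-- what changed: Replaces A's per-window all()-rescans in four specialised loop nests by a dynamic-programming pass that precomputes, for every cell, the run length of the player's pieces ending there in each direction, followed by one unified pass over end cells that counts via O(1) table lookups.
-- intended difference: For n = 5 or 6 on a board containing a vertical run of n of the player's pieces, A's vertical branch ('elif n == 4') never counts it and A returns a count missing those vertical lines, while B counts every direction uniformly for n >= 4; B's value is the intended one since A counts length-5/6 lines in the other three directions. — e.g. on contar_conectados([0,0,0,0,0,0,0, 1,0,0,0,0,0,0, 1,0,0,0,0,0,0, 1,0,0,0,0,0,0, 1,0,0,0,0,0,0, 1,0,0,0,0,0,0], 1, 5): A returns 0, B returns 1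
import Mathlib
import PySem

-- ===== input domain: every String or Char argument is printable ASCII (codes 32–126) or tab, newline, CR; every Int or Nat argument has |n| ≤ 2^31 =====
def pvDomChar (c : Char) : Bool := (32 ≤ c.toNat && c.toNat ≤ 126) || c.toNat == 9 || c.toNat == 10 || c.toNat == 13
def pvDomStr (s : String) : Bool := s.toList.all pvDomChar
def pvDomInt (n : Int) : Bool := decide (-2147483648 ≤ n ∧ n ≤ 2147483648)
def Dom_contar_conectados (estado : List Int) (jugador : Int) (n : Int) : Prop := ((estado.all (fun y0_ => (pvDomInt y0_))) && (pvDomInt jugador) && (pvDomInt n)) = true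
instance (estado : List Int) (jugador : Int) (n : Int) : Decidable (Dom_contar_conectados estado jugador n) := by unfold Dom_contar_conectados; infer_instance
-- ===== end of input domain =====

-- B replaces A's per-window all()-rescans in four specialised loop nests by a dynamic-programming
-- pass (per-cell run lengths ending at each cell, one table per direction) followed by a single
-- unified pass over end cells; same return value on Pre_ outside the stated difference D_.
-- Both ports index the board with pyGetD (default 0): exact under Pre_, which keeps every access in range.

-- ===== PORT A =====
-- A-side helpers: one def per loop block of the Python (literal transliterations)
def pvAHor (estado : List Int) (jugador n count : Int) : Int :=
  (PySem.List.pyRange 0 6 1).foldl (fun count fila =>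
    (PySem.List.pyRange 0 (7 - n + 1) 1).foldl (fun count col =>
      if (PySem.List.pyRange 0 n 1).all (fun i =>
          PySem.List.pyGetD estado (fila * 7 + col + i) 0 == jugador) then
        if n < 4 then
          let esp := false
          let esp := if 0 < col && (PySem.List.pyGetD estado (fila * 7 + col - 1) 0 == 0) then true else esp
          let esp := if col + n < 7 && (PySem.List.pyGetD estado (fila * 7 + col + n) 0 == 0) then true else esp
          if esp then count + 1 else count
        else count + 1
      else count) count) count

def pvAVer (estado : List Int) (jugador n count : Int) : Int :=
  (PySem.List.pyRange 0 7 1).foldl (fun count col =>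
    (PySem.List.pyRange 0 (6 - n + 1) 1).foldl (fun count fila =>
      if (PySem.List.pyRange 0 n 1).all (fun i =>
          PySem.List.pyGetD estado ((fila + i) * 7 + col) 0 == jugador) then
        if n < 4 && 0 < fila && (PySem.List.pyGetD estado ((fila - 1) * 7 + col) 0 == 0) then count + 1
        else if n == 4 then count + 1
        else count
      else count) count) count

def pvAAsc (estado : List Int) (jugador n count : Int) : Int :=
  (PySem.List.pyRange (n - 1) 6 1).foldl (fun count fila =>
    (PySem.List.pyRange 0 (7 - n + 1) 1).foldl (fun count col =>
      if (PySem.List.pyRange 0 n 1).all (fun i =>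
          PySem.List.pyGetD estado ((fila - i) * 7 + col + i) 0 == jugador) then
        if n < 4 then
          let esp := false
          let esp := if 0 < col && fila < 5 && (PySem.List.pyGetD estado ((fila + 1) * 7 + col - 1) 0 == 0) then true else esp
          let esp := if col + n < 7 && 0 ≤ fila - n && (PySem.List.pyGetD estado ((fila - n) * 7 + col + n) 0 == 0) then true else esp
          if esp then count + 1 else count
        else count + 1
      else count) count) count

def pvADesc (estado : List Int) (jugador n count : Int) : Int :=
  (PySem.List.pyRange 0 (6 - n + 1) 1).foldl (fun count fila =>
    (PySem.List.pyRange 0 (7 - n + 1) 1).foldl (fun count col =>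
      if (PySem.List.pyRange 0 n 1).all (fun i =>
          PySem.List.pyGetD estado ((fila + i) * 7 + col + i) 0 == jugador) then
        if n < 4 then
          let esp := false
          let esp := if 0 < col && 0 < fila && (PySem.List.pyGetD estado ((fila - 1) * 7 + col - 1) 0 == 0) then true else esp
          let esp := if col + n < 7 && fila + n < 6 && (PySem.List.pyGetD estado ((fila + n) * 7 + col + n) 0 == 0) then true else esp
          if esp then count + 1 else count
        else count + 1
      else count) count) count

def contar_conectados (estado : List Int) (jugador : Int) (n : Int) : Int :=
  let count : Int := 0
  let count := pvAHor estado jugador n count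
  let count := pvAVer estado jugador n count
  let count := pvAAsc estado jugador n count
  let count := pvADesc estado jugador n count
  count

-- ===== PORT B =====
-- B-side helpers (transliterations of Source B's local data: `filas`, `Z`, `vacia`)
def pvFilas (estado : List Int) : List (List Int) :=
  (PySem.List.pyRange 0 6 1).map (fun r =>
    (PySem.List.pyRange 0 7 1).map (fun c => PySem.List.pyGetD estado (r * 7 + c) 0))

def pvZ : List Int := List.replicate 7 0

def pvVacia (filas : List (List Int)) (r c : Int) : Bool :=
  decide (0 ≤ r) && decide (r < 6) && decide (0 ≤ c) && decide (c < 7)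
    && (PySem.List.pyGetD (PySem.List.pyGetD filas r []) c 0 == 0)

def contar_conectados_alt (estado : List Int) (jugador : Int) (n : Int) : Int :=
  if 7 < n then 0 else  -- no line longer than 7 fits on the 6x7 board
  let filas := pvFilas estado
  -- first DP pass: run lengths ending at each cell, from the left / above / along (+1,+1)
  let iad := (PySem.List.pyRange 0 6 1).foldl
    (fun (st : List (List Int) × List (List Int) × List (List Int)) r =>
      let pa := if 0 < r then PySem.List.pyGetD st.2.1 (r - 1) [] else pvZ
      let pd := if 0 < r then PySem.List.pyGetD st.2.2 (r - 1) [] else pvZ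
      let t := (PySem.List.pyRange 0 7 1).foldl
        (fun (t : List Int × List Int × List Int) c =>
          if PySem.List.pyGetD (PySem.List.pyGetD filas r []) c 0 == jugador then
            (t.1 ++ [(if 0 < c then PySem.List.pyGetD t.1 (c - 1) 0 else 0) + 1],
             t.2.1 ++ [PySem.List.pyGetD pa c 0 + 1],
             t.2.2 ++ [(if 0 < c && 0 < r then PySem.List.pyGetD pd (c - 1) 0 else 0) + 1])
          else (t.1 ++ [0], t.2.1 ++ [0], t.2.2 ++ [0])) ([], [], [])
      (st.1 ++ [t.1], st.2.1 ++ [t.2.1], st.2.2 ++ [t.2.2])) ([], [], [])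
  let izq := iad.1
  let arr := iad.2.1
  let dsc := iad.2.2
  -- second DP pass, bottom-up: run lengths ending at each cell along (-1,+1)
  let an := (PySem.List.pyRange 5 (-1) (-1)).foldl
    (fun (st : List (List Int) × List Int) r =>
      let fs := (PySem.List.pyRange 0 7 1).foldl
        (fun (fs : List Int) c =>
          if PySem.List.pyGetD (PySem.List.pyGetD filas r []) c 0 == jugador then
            fs ++ [(if 0 < c && r < 5 then PySem.List.pyGetD st.2 (c - 1) 0 else 0) + 1]
          else fs ++ [0]) []
      (PySem.List.insert st.1 0 fs, fs)) ([], pvZ)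
  let asc := an.1
  -- counting pass over end cells
  (PySem.List.pyRange 0 6 1).foldl (fun cuenta r =>
    (PySem.List.pyRange 0 7 1).foldl (fun cuenta c =>
      let cuenta := if PySem.List.pyGetD (PySem.List.pyGetD izq r []) c 0 ≥ n
          && (decide (4 ≤ n) || pvVacia filas r (c - n) || pvVacia filas r (c + 1)) then cuenta + 1 else cuenta
      let cuenta := if PySem.List.pyGetD (PySem.List.pyGetD arr r []) c 0 ≥ n
          && (decide (4 ≤ n) || pvVacia filas (r - n) c) then cuenta + 1 else cuenta
      let cuenta := if PySem.List.pyGetD (PySem.List.pyGetD asc r []) c 0 ≥ n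
          && (decide (4 ≤ n) || pvVacia filas (r + n) (c - n) || pvVacia filas (r - 1) (c + 1)) then cuenta + 1 else cuenta
      let cuenta := if PySem.List.pyGetD (PySem.List.pyGetD dsc r []) c 0 ≥ n
          && (decide (4 ≤ n) || pvVacia filas (r - n) (c - n) || pvVacia filas (r + 1) (c + 1)) then cuenta + 1 else cuenta
      cuenta) cuenta) 0

-- ===== PRECONDITION & SPEC =====
-- Pre_ admits every full 6x7 board (42 cells) with n ≥ 1, plus any board with n ≥ 8 (both
-- programs return 0 without reading cells). It excludes boards shorter than 42 cells for
-- 1 ≤ n ≤ 7 (A raises IndexError there) and n ≤ 0, outside the natural domain of counting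
-- lines of positive length (there A counts empty windows, or raises on out-of-range reads
-- for negative n).
def Pre_contar_conectados (estado : List Int) (jugador : Int) (n : Int) : Prop :=
  (42 ≤ estado.length ∧ 1 ≤ n) ∨ 8 ≤ n
instance (estado : List Int) (jugador : Int) (n : Int) : Decidable (Pre_contar_conectados estado jugador n) := by unfold Pre_contar_conectados; infer_instance

def pvWitness_contar_conectados : List Int × Int × Int :=
  ([0,0,0,0,0,0,0, 0,0,0,0,0,0,0, 0,0,0,0,0,0,0, 0,0,0,0,0,0,0, 0,0,1,1,0,0,0, 0,0,2,2,2,0,0], 2, 3)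

-- For n = 5 or 6 on a board containing a vertical run of n of the player's pieces, A's vertical
-- branch ('elif n == 4') never counts it and A returns a count missing those vertical lines,
-- while B counts every direction uniformly for n ≥ 4; B's value is the intended one since A does
-- count length-5/6 lines in the other three directions.
def D_contar_conectados (estado : List Int) (jugador : Int) (n : Int) : Prop :=
  5 ≤ n ∧ n ≤ 6 ∧ ∃ c ∈ PySem.List.pyRange 0 7 1, ∃ f ∈ PySem.List.pyRange 0 (7 - n) 1,
    ∀ i ∈ PySem.List.pyRange 0 n 1, PySem.List.pyGetD estado ((f + i) * 7 + c) 0 = jugador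
instance (estado : List Int) (jugador : Int) (n : Int) : Decidable (D_contar_conectados estado jugador n) := by unfold D_contar_conectados; infer_instance

def Spec_contar_conectados (estado : List Int) (jugador : Int) (n : Int) (out : Int) : Prop := ¬ D_contar_conectados estado jugador n → out = contar_conectados_alt estado jugador n
instance (estado : List Int) (jugador : Int) (n : Int) (out : Int) : Decidable (Spec_contar_conectados estado jugador n out) := by unfold Spec_contar_conectados; infer_instance

def pvDiffWitness_contar_conectados : List Int × Int × Int :=
  ([0,0,0,0,0,0,0, 1,0,0,0,0,0,0, 1,0,0,0,0,0,0, 1,0,0,0,0,0,0, 1,0,0,0,0,0,0, 1,0,0,0,0,0,0], 1, 5)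

def pvDiffWitnessOut_contar_conectados : Int × Int := (0, 1)

-- ===== CLAIM (what is proved, stated in full; the proofs are below) =====
def Claim_unchanged_contar_conectados : Prop := ∀ (estado : List Int) (jugador : Int) (n : Int), Dom_contar_conectados estado jugador n → Pre_contar_conectados estado jugador n → Spec_contar_conectados estado jugador n (contar_conectados estado jugador n)
def Claim_changed_contar_conectados : Prop := Dom_contar_conectados (pvDiffWitness_contar_conectados.1) (pvDiffWitness_contar_conectados.2.1) (pvDiffWitness_contar_conectados.2.2) ∧ Pre_contar_conectados (pvDiffWitness_contar_conectados.1) (pvDiffWitness_contar_conectados.2.1) (pvDiffWitness_contar_conectados.2.2) ∧ D_contar_conectados (pvDiffWitness_contar_conectados.1) (pvDiffWitness_contar_conectados.2.1) (pvDiffWitness_contar_conectados.2.2) ∧ contar_conectados (pvDiffWitness_contar_conectados.1) (pvDiffWitness_contar_conectados.2.1) (pvDiffWitness_contar_conectados.2.2) = pvDiffWitnessOut_contar_conectados.1 ∧ contar_conectados_alt (pvDiffWitness_contar_conectados.1) (pvDiffWitness_contar_conectados.2.1) (pvDiffWitness_contar_conectados.2.2) = pvDiffWitnessOut_contar_conectados.2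 ∧ pvDiffWitnessOut_contar_conectados.1 ≠ pvDiffWitnessOut_contar_conectados.2
def Claim_exact_contar_conectados : Prop := ∀ (estado : List Int) (jugador : Int) (n : Int), Dom_contar_conectados estado jugador n → Pre_contar_conectados estado jugador n → D_contar_conectados estado jugador n → contar_conectados estado jugador n ≠ contar_conectados_alt estado jugador n


-- ===== LEMMAS AND PROOFS =====

-- board cell accessor both ports use (estado[r*7+c])
def pvCell (estado : List Int) (r c : Int) : Int := PySem.List.pyGetD estado (r * 7 + c) 0

-- Int-valued sum over a python range, and the 0/1 indicator
def pvS (a b : Int) (g : Int → Int) : Int := ((PySem.List.pyRange a b 1).map g).sum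

def pvI (b : Bool) : Int := if b then 1 else 0

lemma pvS_congr {a b : Int} {g g' : Int → Int} (h : ∀ x, a ≤ x → x < b → g x = g' x) :
    pvS a b g = pvS a b g' := by
  unfold pvS
  congr 1
  apply List.map_congr_left
  intro x hx
  have := PySem.List.mem_pyRange_one.1 hx
  exact h x this.1 this.2

lemma pvS_shift (a b t : Int) (g : Int → Int) :
    pvS (a + t) (b + t) (fun x => g (x - t)) = pvS a b g := by
  unfold pvS
  rw [PySem.List.pyRange_one a b, PySem.List.pyRange_one (a + t) (b + t)]
  have hd : b + t - (a + t) = b - a := by ring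
  rw [hd, List.map_map, List.map_map]
  congr 1
  apply List.map_congr_left
  intro k _
  simp only [Function.comp_apply]
  congr 1
  ring

lemma pvS_split {a m b : Int} (g : Int → Int) (h1 : a ≤ m) (h2 : m ≤ b) :
    pvS a b g = pvS a m g + pvS m b g := by
  unfold pvS
  rw [PySem.List.pyRange_one_append a m b h1 h2, List.map_append, List.sum_append]

lemma pvS_zero {a b : Int} {g : Int → Int} (h : ∀ x, a ≤ x → x < b → g x = 0) :
    pvS a b g = 0 := by
  unfold pvS
  apply List.sum_eq_zero
  intro x hx
  simp only [List.mem_map] at hx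
  obtain ⟨y, hy, rfl⟩ := hx
  have := PySem.List.mem_pyRange_one.1 hy
  exact h y this.1 this.2

lemma pvS_add (a b : Int) (g h : Int → Int) :
    pvS a b (fun x => g x + h x) = pvS a b g + pvS a b h := by
  unfold pvS
  rw [PySem.List.sum_map_add_int]

lemma pvList_sum_swap (l1 l2 : List Int) (g : Int → Int → Int) :
    (l1.map (fun x => (l2.map (fun y => g x y)).sum)).sum
      = (l2.map (fun y => (l1.map (fun x => g x y)).sum)).sum := by
  induction l1 with
  | nil => simp
  | cons x l ih =>
    simp only [List.map_cons, List.sum_cons, ih]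
    rw [← PySem.List.sum_map_add_int]

lemma pvS_swap (a b c d : Int) (g : Int → Int → Int) :
    pvS a b (fun x => pvS c d (fun y => g x y)) = pvS c d (fun y => pvS a b (fun x => g x y)) := by
  unfold pvS
  exact pvList_sum_swap _ _ g

lemma pvS_nonneg {a b : Int} {g : Int → Int} (h : ∀ x, a ≤ x → x < b → 0 ≤ g x) :
    0 ≤ pvS a b g := by
  unfold pvS
  apply List.sum_nonneg
  intro x hx
  simp only [List.mem_map] at hx
  obtain ⟨y, hy, rfl⟩ := hx
  have := PySem.List.mem_pyRange_one.1 hy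
  exact h y this.1 this.2

lemma pvS_pos {a b x0 : Int} {g : Int → Int} (hnn : ∀ x, a ≤ x → x < b → 0 ≤ g x)
    (h1 : a ≤ x0) (h2 : x0 < b) (hx : 1 ≤ g x0) : 1 ≤ pvS a b g := by
  have hsplit : pvS a b g = pvS a x0 g + pvS x0 b g := pvS_split g h1 (le_of_lt h2)
  have hsplit2 : pvS x0 b g = pvS x0 (x0 + 1) g + pvS (x0 + 1) b g := pvS_split g (by omega) (by omega)
  have hone : pvS x0 (x0 + 1) g = g x0 := by
    unfold pvS
    rw [PySem.List.pyRange_one_singleton]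
    simp
  have n1 : 0 ≤ pvS a x0 g := pvS_nonneg (fun x hx1 hx2 => hnn x hx1 (by omega))
  have n2 : 0 ≤ pvS (x0 + 1) b g := pvS_nonneg (fun x hx1 hx2 => hnn x (by omega) hx2)
  omega

lemma pvI_nonneg (b : Bool) : 0 ≤ pvI b := by unfold pvI; split <;> omega

-- window indicators, indexed by the START cell of the window (A's indexing)
def pvLineH (e : List Int) (j n f c : Int) : Bool :=
  (PySem.List.pyRange 0 n 1).all (fun i => pvCell e f (c + i) == j)
def pvLineV (e : List Int) (j n f c : Int) : Bool :=
  (PySem.List.pyRange 0 n 1).all (fun i => pvCell e (f + i) c == j)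
def pvLineA (e : List Int) (j n f c : Int) : Bool :=
  (PySem.List.pyRange 0 n 1).all (fun i => pvCell e (f - i) (c + i) == j)
def pvLineD (e : List Int) (j n f c : Int) : Bool :=
  (PySem.List.pyRange 0 n 1).all (fun i => pvCell e (f + i) (c + i) == j)

def pvOpenH (e : List Int) (n f c : Int) : Bool :=
  (decide (0 < c) && (pvCell e f (c - 1) == 0)) || (decide (c + n < 7) && (pvCell e f (c + n) == 0))
def pvOpenV (e : List Int) (n f c : Int) : Bool :=
  decide (0 < f) && (pvCell e (f - 1) c == 0)
def pvOpenA (e : List Int) (n f c : Int) : Bool :=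
  (decide (0 < c) && decide (f < 5) && (pvCell e (f + 1) (c - 1) == 0))
    || (decide (c + n < 7) && decide (0 ≤ f - n) && (pvCell e (f - n) (c + n) == 0))
def pvOpenD (e : List Int) (n f c : Int) : Bool :=
  (decide (0 < c) && decide (0 < f) && (pvCell e (f - 1) (c - 1) == 0))
    || (decide (c + n < 7) && decide (f + n < 6) && (pvCell e (f + n) (c + n) == 0))

def pvGoodH (e : List Int) (j n f c : Int) : Bool :=
  (decide (0 ≤ f) && decide (f < 6) && decide (0 ≤ c) && decide (c + n ≤ 7))
    && (pvLineH e j n f c && (decide (4 ≤ n) || pvOpenH e n f c))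
def pvGoodVB (e : List Int) (j n f c : Int) : Bool :=
  (decide (0 ≤ c) && decide (c < 7) && decide (0 ≤ f) && decide (f + n ≤ 6))
    && (pvLineV e j n f c && (decide (4 ≤ n) || pvOpenV e n f c))
def pvGoodVA (e : List Int) (j n f c : Int) : Bool :=
  (decide (0 ≤ c) && decide (c < 7) && decide (0 ≤ f) && decide (f + n ≤ 6))
    && (pvLineV e j n f c && ((decide (n < 4) && pvOpenV e n f c) || decide (n = 4)))
def pvGoodA (e : List Int) (j n f c : Int) : Bool :=
  (decide (n - 1 ≤ f) && decide (f < 6) && decide (0 ≤ c) && decide (c + n ≤ 7))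
    && (pvLineA e j n f c && (decide (4 ≤ n) || pvOpenA e n f c))
def pvGoodD (e : List Int) (j n f c : Int) : Bool :=
  (decide (0 ≤ f) && decide (f + n ≤ 6) && decide (0 ≤ c) && decide (c + n ≤ 7))
    && (pvLineD e j n f c && (decide (4 ≤ n) || pvOpenD e n f c))

-- A's horizontal block as a full-grid indicator sum
lemma pvAHor_eq (e : List Int) (j n cnt : Int) (h1 : 1 ≤ n) :
    pvAHor e j n cnt = cnt + pvS 0 6 (fun f => pvS 0 7 (fun c => pvI (pvGoodH e j n f c))) := by
  by_cases h7 : n ≤ 7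
  · unfold pvAHor
    rw [PySem.List.foldl_congr_mem' _ _
      (fun count fila => count + pvS 0 (7 - n + 1) (fun c => pvI (pvGoodH e j n fila c))) cnt ?_]
    · rw [PySem.List.foldl_add]
      have : ∀ fila, 0 ≤ fila → fila < 6 →
          pvS 0 (7 - n + 1) (fun c => pvI (pvGoodH e j n fila c))
            = pvS 0 7 (fun c => pvI (pvGoodH e j n fila c)) := by
        intro fila _ _
        rw [pvS_split (a := 0) (m := 7 - n + 1) (b := 7) _ (by omega) (by omega)]
        have hz : pvS (7 - n + 1) 7 (fun c => pvI (pvGoodH e j n fila c)) = 0 := by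
          apply pvS_zero
          intro c hc1 hc2
          have hd : decide (c + n ≤ 7) = false := decide_eq_false (by omega)
          simp [pvGoodH, pvI, hd]
        omega
      calc cnt + ((PySem.List.pyRange 0 6 1).map (fun fila => pvS 0 (7 - n + 1) (fun c => pvI (pvGoodH e j n fila c)))).sum
          = cnt + pvS 0 6 (fun fila => pvS 0 (7 - n + 1) (fun c => pvI (pvGoodH e j n fila c))) := rfl
        _ = cnt + pvS 0 6 (fun fila => pvS 0 7 (fun c => pvI (pvGoodH e j n fila c))) := by
            rw [pvS_congr (fun x hx1 hx2 => this x hx1 hx2)]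
    · intro fila hfila count
      have hf := PySem.List.mem_pyRange_one.1 hfila
      rw [PySem.List.foldl_congr_mem' _ _
        (fun count col => if pvGoodH e j n fila col = true then count + 1 else count) count ?_]
      · rw [PySem.List.foldl_if_add_one]
        congr 1
        rw [← PySem.List.sum_map_ite_one_zero]
        rfl
      · intro col hcol count
        have hc := PySem.List.mem_pyRange_one.1 hcol
        have hall : pvLineH e j n fila col =
            (PySem.List.pyRange 0 n 1).all (fun i =>
              PySem.List.pyGetD e (fila * 7 + col + i) 0 == j) := by
          unfold pvLineH pvCell
          congr 1
          funext i
          have : fila * 7 + (col + i) = fila * 7 + col + i := by ring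
          rw [this]
        have hfit : (decide (0 ≤ fila) && decide (fila < 6) && decide (0 ≤ col) && decide (col + n ≤ 7)) = true := by
          simp only [Bool.and_eq_true, decide_eq_true_eq]
          omega
        have hopen : pvOpenH e n fila col =
            ((decide (0 < col) && (PySem.List.pyGetD e (fila * 7 + col - 1) 0 == 0))
              || (decide (col + n < 7) && (PySem.List.pyGetD e (fila * 7 + col + n) 0 == 0))) := by
          unfold pvOpenH pvCell
          have e1 : fila * 7 + (col - 1) = fila * 7 + col - 1 := by ring
          have e2 : fila * 7 + (col + n) = fila * 7 + col + n := by ring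
          rw [e1, e2]
        show _ = (if pvGoodH e j n fila col = true then count + 1 else count)
        unfold pvGoodH
        rw [hall, hfit, hopen, Bool.true_and]
        by_cases hA : (PySem.List.pyRange 0 n 1).all (fun i =>
            PySem.List.pyGetD e (fila * 7 + col + i) 0 == j) = true
        · by_cases hn : n < 4
          · simp only [hA, if_true, Bool.true_and, show decide ((4:Int) ≤ n) = false by
              simp only [decide_eq_false_iff_not]; omega, Bool.false_or, hn]
            by_cases hL : (decide (0 < col) && (PySem.List.pyGetD e (fila * 7 + col - 1) 0 == 0)) = true <;>
              by_cases hR : (decide (col + n < 7) && (PySem.List.pyGetD e (fila * 7 + col + n) 0 == 0)) = true <;>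
                simp [hL, hR]
          · simp [hA, hn, show (4:Int) ≤ n by omega]
        · simp [hA]
  · unfold pvAHor
    rw [PySem.List.pyRange_one_eq_nil (a := (0:Int)) (b := 7 - n + 1) (by omega)]
    simp only [List.foldl_nil]
    rw [PySem.List.foldl_ignore]
    have : pvS 0 6 (fun f => pvS 0 7 (fun c => pvI (pvGoodH e j n f c))) = 0 := by
      apply pvS_zero
      intro f _ _
      apply pvS_zero
      intro c hc1 _
      have hd : decide (c + n ≤ 7) = false := decide_eq_false (by omega)
      simp [pvGoodH, pvI, hd]
    omega

lemma pvAVer_eq (e : List Int) (j n cnt : Int) (h1 : 1 ≤ n) :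
    pvAVer e j n cnt = cnt + pvS 0 6 (fun f => pvS 0 7 (fun c => pvI (pvGoodVA e j n f c))) := by
  by_cases h7 : n ≤ 7
  · unfold pvAVer
    rw [PySem.List.foldl_congr_mem' _ _
      (fun count col => count + pvS 0 (6 - n + 1) (fun f => pvI (pvGoodVA e j n f col))) cnt ?_]
    · rw [PySem.List.foldl_add]
      have hext : ∀ col, 0 ≤ col → col < 7 →
          pvS 0 (6 - n + 1) (fun f => pvI (pvGoodVA e j n f col))
            = pvS 0 6 (fun f => pvI (pvGoodVA e j n f col)) := by
        intro col _ _
        rw [pvS_split (a := 0) (m := 6 - n + 1) (b := 6) _ (by omega) (by omega)]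
        have hz : pvS (6 - n + 1) 6 (fun f => pvI (pvGoodVA e j n f col)) = 0 := by
          apply pvS_zero
          intro f hf1 hf2
          have hd : decide (f + n ≤ 6) = false := decide_eq_false (by omega)
          simp [pvGoodVA, pvI, hd]
        omega
      calc cnt + ((PySem.List.pyRange 0 7 1).map (fun col => pvS 0 (6 - n + 1) (fun f => pvI (pvGoodVA e j n f col)))).sum
          = cnt + pvS 0 7 (fun col => pvS 0 (6 - n + 1) (fun f => pvI (pvGoodVA e j n f col))) := rfl
        _ = cnt + pvS 0 7 (fun col => pvS 0 6 (fun f => pvI (pvGoodVA e j n f col))) := by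
            rw [pvS_congr (fun x hx1 hx2 => hext x hx1 hx2)]
        _ = cnt + pvS 0 6 (fun f => pvS 0 7 (fun col => pvI (pvGoodVA e j n f col))) := by
            rw [pvS_swap]
    · intro col hcol count
      have hc := PySem.List.mem_pyRange_one.1 hcol
      rw [PySem.List.foldl_congr_mem' _ _
        (fun count fila => if pvGoodVA e j n fila col = true then count + 1 else count) count ?_]
      · rw [PySem.List.foldl_if_add_one]
        congr 1
        rw [← PySem.List.sum_map_ite_one_zero]
        rfl
      · intro fila hfila count
        have hf := PySem.List.mem_pyRange_one.1 hfila
        have hfit : (decide (0 ≤ col) && decide (col < 7) && decide (0 ≤ fila) && decide (fila + n ≤ 6)) = true := by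
          simp only [Bool.and_eq_true, decide_eq_true_eq]
          omega
        show _ = (if pvGoodVA e j n fila col = true then count + 1 else count)
        unfold pvGoodVA pvLineV pvOpenV pvCell
        rw [hfit, Bool.true_and]
        by_cases hA : (PySem.List.pyRange 0 n 1).all (fun i =>
            PySem.List.pyGetD e ((fila + i) * 7 + col) 0 == j) = true
        · by_cases h4 : n < 4
          · by_cases hf0 : 0 < fila <;>
              by_cases hab : (PySem.List.pyGetD e ((fila - 1) * 7 + col) 0 == 0) = true <;>
                simp [hA, h4, hf0, hab, show n ≠ 4 by omega]
          · by_cases h44 : n = 4 <;> simp [hA, h4, h44]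
        · simp [hA]
  · unfold pvAVer
    rw [PySem.List.pyRange_one_eq_nil (a := (0:Int)) (b := 6 - n + 1) (by omega)]
    simp only [List.foldl_nil]
    rw [PySem.List.foldl_ignore]
    have : pvS 0 6 (fun f => pvS 0 7 (fun c => pvI (pvGoodVA e j n f c))) = 0 := by
      apply pvS_zero
      intro f hf1 hf2
      apply pvS_zero
      intro c _ _
      have hd : decide (f + n ≤ 6) = false := decide_eq_false (by omega)
      simp [pvGoodVA, pvI, hd]
    omega

lemma pvAAsc_eq (e : List Int) (j n cnt : Int) (h1 : 1 ≤ n) :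
    pvAAsc e j n cnt = cnt + pvS 0 6 (fun f => pvS 0 7 (fun c => pvI (pvGoodA e j n f c))) := by
  by_cases h7 : n ≤ 7
  · unfold pvAAsc
    rw [PySem.List.foldl_congr_mem' _ _
      (fun count fila => count + pvS 0 (7 - n + 1) (fun c => pvI (pvGoodA e j n fila c))) cnt ?_]
    · rw [PySem.List.foldl_add]
      have hext : ∀ fila, n - 1 ≤ fila → fila < 6 →
          pvS 0 (7 - n + 1) (fun c => pvI (pvGoodA e j n fila c))
            = pvS 0 7 (fun c => pvI (pvGoodA e j n fila c)) := by
        intro fila _ _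
        rw [pvS_split (a := 0) (m := 7 - n + 1) (b := 7) _ (by omega) (by omega)]
        have hz : pvS (7 - n + 1) 7 (fun c => pvI (pvGoodA e j n fila c)) = 0 := by
          apply pvS_zero
          intro c hc1 hc2
          have hd : decide (c + n ≤ 7) = false := decide_eq_false (by omega)
          simp [pvGoodA, pvI, hd]
        omega
      calc cnt + ((PySem.List.pyRange (n - 1) 6 1).map (fun fila => pvS 0 (7 - n + 1) (fun c => pvI (pvGoodA e j n fila c)))).sum
          = cnt + pvS (n - 1) 6 (fun fila => pvS 0 (7 - n + 1) (fun c => pvI (pvGoodA e j n fila c))) := rfl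
        _ = cnt + pvS (n - 1) 6 (fun fila => pvS 0 7 (fun c => pvI (pvGoodA e j n fila c))) := by
            rw [pvS_congr (fun x hx1 hx2 => hext x hx1 hx2)]
        _ = cnt + pvS 0 6 (fun fila => pvS 0 7 (fun c => pvI (pvGoodA e j n fila c))) := by
            congr 1
            rw [pvS_split (a := 0) (m := n - 1) (b := 6)
              (fun fila => pvS 0 7 (fun c => pvI (pvGoodA e j n fila c))) (by omega) (by omega)]
            have hz : pvS 0 (n - 1) (fun fila => pvS 0 7 (fun c => pvI (pvGoodA e j n fila c))) = 0 := by
              apply pvS_zero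
              intro f hf1 hf2
              apply pvS_zero
              intro c _ _
              have hg : pvGoodA e j n f c = false := by
                unfold pvGoodA
                rw [show decide (n - 1 ≤ f) = false from decide_eq_false (by omega)]
                simp
              simp [hg, pvI]
            omega
    · intro fila hfila count
      have hf := PySem.List.mem_pyRange_one.1 hfila
      rw [PySem.List.foldl_congr_mem' _ _
        (fun count col => if pvGoodA e j n fila col = true then count + 1 else count) count ?_]
      · rw [PySem.List.foldl_if_add_one]
        congr 1
        rw [← PySem.List.sum_map_ite_one_zero]
        rfl
      · intro col hcol count
        have hc := PySem.List.mem_pyRange_one.1 hcol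
        have hall : pvLineA e j n fila col =
            (PySem.List.pyRange 0 n 1).all (fun i =>
              PySem.List.pyGetD e ((fila - i) * 7 + col + i) 0 == j) := by
          unfold pvLineA pvCell
          congr 1
          funext i
          have : (fila - i) * 7 + (col + i) = (fila - i) * 7 + col + i := by ring
          rw [this]
        have hfit : (decide (n - 1 ≤ fila) && decide (fila < 6) && decide (0 ≤ col) && decide (col + n ≤ 7)) = true := by
          simp only [Bool.and_eq_true, decide_eq_true_eq]
          omega
        have hopen : pvOpenA e n fila col =
            ((decide (0 < col) && decide (fila < 5) && (PySem.List.pyGetD e ((fila + 1) * 7 + col - 1) 0 == 0))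
              || (decide (col + n < 7) && decide (0 ≤ fila - n) && (PySem.List.pyGetD e ((fila - n) * 7 + col + n) 0 == 0))) := by
          unfold pvOpenA pvCell
          have e1 : (fila + 1) * 7 + (col - 1) = (fila + 1) * 7 + col - 1 := by ring
          have e2 : (fila - n) * 7 + (col + n) = (fila - n) * 7 + col + n := by ring
          rw [e1, e2]
        show _ = (if pvGoodA e j n fila col = true then count + 1 else count)
        unfold pvGoodA
        rw [hall, hfit, hopen, Bool.true_and]
        by_cases hA : (PySem.List.pyRange 0 n 1).all (fun i =>
            PySem.List.pyGetD e ((fila - i) * 7 + col + i) 0 == j) = true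
        · by_cases hn : n < 4
          · simp only [hA, if_true, Bool.true_and, show decide ((4:Int) ≤ n) = false by
              simp only [decide_eq_false_iff_not]; omega, Bool.false_or, hn]
            by_cases hL : (decide (0 < col) && decide (fila < 5) && (PySem.List.pyGetD e ((fila + 1) * 7 + col - 1) 0 == 0)) = true <;>
              by_cases hR : (decide (col + n < 7) && decide (0 ≤ fila - n) && (PySem.List.pyGetD e ((fila - n) * 7 + col + n) 0 == 0)) = true <;>
                simp [hL, hR]
          · simp [hA, hn, show (4:Int) ≤ n by omega]
        · simp [hA]
  · unfold pvAAsc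
    rw [PySem.List.pyRange_one_eq_nil (a := (0:Int)) (b := 7 - n + 1) (by omega)]
    simp only [List.foldl_nil]
    rw [PySem.List.foldl_ignore]
    have : pvS 0 6 (fun f => pvS 0 7 (fun c => pvI (pvGoodA e j n f c))) = 0 := by
      apply pvS_zero
      intro f _ _
      apply pvS_zero
      intro c hc1 _
      have hd : decide (c + n ≤ 7) = false := decide_eq_false (by omega)
      simp [pvGoodA, pvI, hd]
    omega

lemma pvADesc_eq (e : List Int) (j n cnt : Int) (h1 : 1 ≤ n) :
    pvADesc e j n cnt = cnt + pvS 0 6 (fun f => pvS 0 7 (fun c => pvI (pvGoodD e j n f c))) := by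
  by_cases h7 : n ≤ 7
  · unfold pvADesc
    rw [PySem.List.foldl_congr_mem' _ _
      (fun count fila => count + pvS 0 (7 - n + 1) (fun c => pvI (pvGoodD e j n fila c))) cnt ?_]
    · rw [PySem.List.foldl_add]
      have hext : ∀ fila, 0 ≤ fila → fila < 7 - n + 1 →
          pvS 0 (7 - n + 1) (fun c => pvI (pvGoodD e j n fila c))
            = pvS 0 7 (fun c => pvI (pvGoodD e j n fila c)) := by
        intro fila _ _
        rw [pvS_split (a := 0) (m := 7 - n + 1) (b := 7) _ (by omega) (by omega)]
        have hz : pvS (7 - n + 1) 7 (fun c => pvI (pvGoodD e j n fila c)) = 0 := by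
          apply pvS_zero
          intro c hc1 hc2
          have hd : decide (c + n ≤ 7) = false := decide_eq_false (by omega)
          simp [pvGoodD, pvI, hd]
        omega
      calc cnt + ((PySem.List.pyRange 0 (6 - n + 1) 1).map (fun fila => pvS 0 (7 - n + 1) (fun c => pvI (pvGoodD e j n fila c)))).sum
          = cnt + pvS 0 (6 - n + 1) (fun fila => pvS 0 (7 - n + 1) (fun c => pvI (pvGoodD e j n fila c))) := rfl
        _ = cnt + pvS 0 (6 - n + 1) (fun fila => pvS 0 7 (fun c => pvI (pvGoodD e j n fila c))) := by
            rw [pvS_congr (fun x hx1 hx2 => hext x hx1 (by omega))]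
        _ = cnt + pvS 0 6 (fun fila => pvS 0 7 (fun c => pvI (pvGoodD e j n fila c))) := by
            congr 1
            rw [pvS_split (a := 0) (m := 6 - n + 1) (b := 6)
              (fun fila => pvS 0 7 (fun c => pvI (pvGoodD e j n fila c))) (by omega) (by omega)]
            have hz : pvS (6 - n + 1) 6 (fun fila => pvS 0 7 (fun c => pvI (pvGoodD e j n fila c))) = 0 := by
              apply pvS_zero
              intro f hf1 hf2
              apply pvS_zero
              intro c _ _
              have hd : decide (f + n ≤ 6) = false := decide_eq_false (by omega)
              simp [pvGoodD, pvI, hd]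
            omega
    · intro fila hfila count
      have hf := PySem.List.mem_pyRange_one.1 hfila
      rw [PySem.List.foldl_congr_mem' _ _
        (fun count col => if pvGoodD e j n fila col = true then count + 1 else count) count ?_]
      · rw [PySem.List.foldl_if_add_one]
        congr 1
        rw [← PySem.List.sum_map_ite_one_zero]
        rfl
      · intro col hcol count
        have hc := PySem.List.mem_pyRange_one.1 hcol
        have hall : pvLineD e j n fila col =
            (PySem.List.pyRange 0 n 1).all (fun i =>
              PySem.List.pyGetD e ((fila + i) * 7 + col + i) 0 == j) := by
          unfold pvLineD pvCell
          congr 1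
          funext i
          have : (fila + i) * 7 + (col + i) = (fila + i) * 7 + col + i := by ring
          rw [this]
        have hfit : (decide (0 ≤ fila) && decide (fila + n ≤ 6) && decide (0 ≤ col) && decide (col + n ≤ 7)) = true := by
          simp only [Bool.and_eq_true, decide_eq_true_eq]
          omega
        have hopen : pvOpenD e n fila col =
            ((decide (0 < col) && decide (0 < fila) && (PySem.List.pyGetD e ((fila - 1) * 7 + col - 1) 0 == 0))
              || (decide (col + n < 7) && decide (fila + n < 6) && (PySem.List.pyGetD e ((fila + n) * 7 + col + n) 0 == 0))) := by
          unfold pvOpenD pvCell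
          have e1 : (fila - 1) * 7 + (col - 1) = (fila - 1) * 7 + col - 1 := by ring
          have e2 : (fila + n) * 7 + (col + n) = (fila + n) * 7 + col + n := by ring
          rw [e1, e2]
        show _ = (if pvGoodD e j n fila col = true then count + 1 else count)
        unfold pvGoodD
        rw [hall, hfit, hopen, Bool.true_and]
        by_cases hA : (PySem.List.pyRange 0 n 1).all (fun i =>
            PySem.List.pyGetD e ((fila + i) * 7 + col + i) 0 == j) = true
        · by_cases hn : n < 4
          · simp only [hA, if_true, Bool.true_and, show decide ((4:Int) ≤ n) = false by
              simp only [decide_eq_false_iff_not]; omega, Bool.false_or, hn]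
            by_cases hL : (decide (0 < col) && decide (0 < fila) && (PySem.List.pyGetD e ((fila - 1) * 7 + col - 1) 0 == 0)) = true <;>
              by_cases hR : (decide (col + n < 7) && decide (fila + n < 6) && (PySem.List.pyGetD e ((fila + n) * 7 + col + n) 0 == 0)) = true <;>
                simp [hL, hR]
          · simp [hA, hn, show (4:Int) ≤ n by omega]
        · simp [hA]
  · unfold pvADesc
    rw [PySem.List.pyRange_one_eq_nil (a := (0:Int)) (b := 7 - n + 1) (by omega)]
    simp only [List.foldl_nil]
    rw [PySem.List.foldl_ignore]
    have : pvS 0 6 (fun f => pvS 0 7 (fun c => pvI (pvGoodD e j n f c))) = 0 := by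
      apply pvS_zero
      intro f _ _
      apply pvS_zero
      intro c hc1 _
      have hd : decide (c + n ≤ 7) = false := decide_eq_false (by omega)
      simp [pvGoodD, pvI, hd]
    omega

-- A as four full-grid sums
lemma pvA_decomp (e : List Int) (j n : Int) (h1 : 1 ≤ n) :
    contar_conectados e j n
      = pvS 0 6 (fun f => pvS 0 7 (fun c => pvI (pvGoodH e j n f c)))
        + pvS 0 6 (fun f => pvS 0 7 (fun c => pvI (pvGoodVA e j n f c)))
        + pvS 0 6 (fun f => pvS 0 7 (fun c => pvI (pvGoodA e j n f c)))
        + pvS 0 6 (fun f => pvS 0 7 (fun c => pvI (pvGoodD e j n f c))) := by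
  have e1 : contar_conectados e j n
      = pvADesc e j n (pvAAsc e j n (pvAVer e j n (pvAHor e j n 0))) := rfl
  rw [e1, pvAHor_eq e j n 0 h1, pvAVer_eq e j n _ h1, pvAAsc_eq e j n _ h1, pvADesc_eq e j n _ h1]
  omega

-- reference run-length functions (one per direction), recursively defined
def pvHS (e : List Int) (j : Int) (r : Nat) : Nat → Int
  | 0 => if pvCell e (r : Int) 0 == j then 1 else 0
  | c + 1 => if pvCell e (r : Int) ((c : Int) + 1) == j then pvHS e j r c + 1 else 0

def pvVS (e : List Int) (j : Int) (c : Nat) : Nat → Int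
  | 0 => if pvCell e 0 (c : Int) == j then 1 else 0
  | r + 1 => if pvCell e ((r : Int) + 1) (c : Int) == j then pvVS e j c r + 1 else 0

def pvDS (e : List Int) (j : Int) : Nat → Nat → Int
  | 0, c => if pvCell e 0 (c : Int) == j then 1 else 0
  | r + 1, 0 => if pvCell e ((r : Int) + 1) 0 == j then 1 else 0
  | r + 1, c + 1 => if pvCell e ((r : Int) + 1) ((c : Int) + 1) == j then pvDS e j r c + 1 else 0

def pvAS (e : List Int) (j : Int) : Nat → Nat → Int
  | r, 0 => if pvCell e (r : Int) 0 == j then 1 else 0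
  | r, c + 1 => if pvCell e (r : Int) ((c : Int) + 1) == j then
      (if 5 ≤ r then 0 else pvAS e j (r + 1) c) + 1 else 0

lemma pvHS_nonneg (e : List Int) (j : Int) (r c : Nat) : 0 ≤ pvHS e j r c := by
  cases c <;> · unfold pvHS; split
                · first
                  | exact le_add_of_nonneg_of_le (pvHS_nonneg e j r _) (by omega)
                  | omega
                · omega

lemma pvVS_nonneg (e : List Int) (j : Int) (c r : Nat) : 0 ≤ pvVS e j c r := by
  cases r <;> · unfold pvVS; split
                · first
                  | exact le_add_of_nonneg_of_le (pvVS_nonneg e j c _) (by omega)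
                  | omega
                · omega

lemma pvDS_nonneg (e : List Int) (j : Int) (r c : Nat) : 0 ≤ pvDS e j r c := by
  cases r with
  | zero => unfold pvDS; split <;> omega
  | succ r =>
    cases c with
    | zero => unfold pvDS; split <;> omega
    | succ c =>
      unfold pvDS; split
      · exact le_add_of_nonneg_of_le (pvDS_nonneg e j r c) (by omega)
      · omega

lemma pvAS_nonneg (e : List Int) (j : Int) (r c : Nat) : 0 ≤ pvAS e j r c := by
  cases c with
  | zero => unfold pvAS; split <;> omega
  | succ c =>
    unfold pvAS; split
    · split
      · omega
      · exact le_add_of_nonneg_of_le (pvAS_nonneg e j (r+1) c) (by omega)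
    · omega

lemma pvHS_ge (e : List Int) (j : Int) (r : Nat) (c : Nat) (n : Int) (h1 : 1 ≤ n) :
    n ≤ pvHS e j r c ↔
      (n ≤ (c : Int) + 1 ∧ ∀ i : Int, 0 ≤ i → i < n → (pvCell e (r : Int) ((c : Int) - i) == j) = true) := by
  induction c generalizing n with
  | zero =>
    unfold pvHS
    by_cases hm : (pvCell e (r : Int) 0 == j) = true
    · rw [if_pos hm]
      constructor
      · intro h
        refine ⟨by omega, fun i h0 hn => ?_⟩
        have : i = 0 := by omega
        subst this
        simpa using hm
      · intro ⟨h, _⟩; omega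
    · rw [if_neg hm]
      constructor
      · omega
      · intro ⟨h, hall⟩
        exact absurd (by simpa using hall 0 le_rfl (by omega)) hm
  | succ c ih =>
    unfold pvHS
    by_cases hm : (pvCell e (r : Int) ((c : Int) + 1) == j) = true
    · rw [if_pos hm]
      by_cases hn1 : n = 1
      · subst hn1
        have := pvHS_nonneg e j r c
        constructor
        · intro _
          refine ⟨by push_cast; omega, fun i h0 hn => ?_⟩
          have : i = 0 := by omega
          subst this
          rw [show ((c + 1 : Nat) : Int) - 0 = (c : Int) + 1 from by push_cast; ring]
          exact hm
        · intro _; omega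
      · have h2 : 1 ≤ n - 1 := by omega
        have hiff := ih (n - 1) h2
        constructor
        · intro h
          have hrec : n - 1 ≤ pvHS e j r c := by omega
          obtain ⟨hb, hall⟩ := hiff.1 hrec
          refine ⟨by push_cast; omega, fun i h0 hn => ?_⟩
          by_cases hi0 : i = 0
          · subst hi0
            rw [show ((c + 1 : Nat) : Int) - 0 = (c : Int) + 1 from by push_cast; ring]
            exact hm
          · rw [show ((c + 1 : Nat) : Int) - i = (c : Int) - (i - 1) from by push_cast; ring]
            exact hall (i - 1) (by omega) (by omega)
        · intro ⟨hb, hall⟩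
          have : n - 1 ≤ pvHS e j r c := by
            apply hiff.2
            refine ⟨by push_cast at hb ⊢; omega, fun i h0 hn => ?_⟩
            have := hall (i + 1) (by omega) (by omega)
            rw [show ((c + 1 : Nat) : Int) - (i + 1) = (c : Int) - i from by push_cast; ring] at this
            exact this
          omega
    · rw [if_neg hm]
      constructor
      · omega
      · intro ⟨hb, hall⟩
        have := hall 0 le_rfl (by omega)
        rw [show ((c + 1 : Nat) : Int) - 0 = (c : Int) + 1 from by push_cast; ring] at this
        exact absurd this hm

lemma pvVS_ge (e : List Int) (j : Int) (c : Nat) (r : Nat) (n : Int) (h1 : 1 ≤ n) :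
    n ≤ pvVS e j c r ↔
      (n ≤ (r : Int) + 1 ∧ ∀ i : Int, 0 ≤ i → i < n → (pvCell e ((r : Int) - i) (c : Int) == j) = true) := by
  induction r generalizing n with
  | zero =>
    unfold pvVS
    by_cases hm : (pvCell e 0 (c : Int) == j) = true
    · rw [if_pos hm]
      constructor
      · intro h
        refine ⟨by omega, fun i h0 hn => ?_⟩
        have : i = 0 := by omega
        subst this
        rw [show ((0 : Nat) : Int) - 0 = 0 from by ring]
        exact hm
      · intro ⟨h, _⟩; omega
    · rw [if_neg hm]
      constructor
      · omega
      · intro ⟨h, hall⟩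
        have := hall 0 le_rfl (by omega)
        rw [show ((0 : Nat) : Int) - 0 = 0 from by ring] at this
        exact absurd this hm
  | succ r ih =>
    unfold pvVS
    by_cases hm : (pvCell e ((r : Int) + 1) (c : Int) == j) = true
    · rw [if_pos hm]
      by_cases hn1 : n = 1
      · subst hn1
        have := pvVS_nonneg e j c r
        constructor
        · intro _
          refine ⟨by push_cast; omega, fun i h0 hn => ?_⟩
          have : i = 0 := by omega
          subst this
          rw [show ((r + 1 : Nat) : Int) - 0 = (r : Int) + 1 from by push_cast; ring]
          exact hm
        · intro _; omega
      · have h2 : 1 ≤ n - 1 := by omega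
        have hiff := ih (n - 1) h2
        constructor
        · intro h
          have hrec : n - 1 ≤ pvVS e j c r := by omega
          obtain ⟨hb, hall⟩ := hiff.1 hrec
          refine ⟨by push_cast; omega, fun i h0 hn => ?_⟩
          by_cases hi0 : i = 0
          · subst hi0
            rw [show ((r + 1 : Nat) : Int) - 0 = (r : Int) + 1 from by push_cast; ring]
            exact hm
          · rw [show ((r + 1 : Nat) : Int) - i = (r : Int) - (i - 1) from by push_cast; ring]
            exact hall (i - 1) (by omega) (by omega)
        · intro ⟨hb, hall⟩
          have : n - 1 ≤ pvVS e j c r := by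
            apply hiff.2
            refine ⟨by push_cast at hb ⊢; omega, fun i h0 hn => ?_⟩
            have := hall (i + 1) (by omega) (by omega)
            rw [show ((r + 1 : Nat) : Int) - (i + 1) = (r : Int) - i from by push_cast; ring] at this
            exact this
          omega
    · rw [if_neg hm]
      constructor
      · omega
      · intro ⟨hb, hall⟩
        have := hall 0 le_rfl (by omega)
        rw [show ((r + 1 : Nat) : Int) - 0 = (r : Int) + 1 from by push_cast; ring] at this
        exact absurd this hm

lemma pvDS_ge (e : List Int) (j : Int) (r c : Nat) (n : Int) (h1 : 1 ≤ n) :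
    n ≤ pvDS e j r c ↔
      (n ≤ (r : Int) + 1 ∧ n ≤ (c : Int) + 1 ∧
        ∀ i : Int, 0 ≤ i → i < n → (pvCell e ((r : Int) - i) ((c : Int) - i) == j) = true) := by
  induction r generalizing c n with
  | zero =>
    unfold pvDS
    by_cases hm : (pvCell e 0 (c : Int) == j) = true
    · rw [if_pos hm]
      constructor
      · intro h
        refine ⟨by omega, by omega, fun i h0 hn => ?_⟩
        have : i = 0 := by omega
        subst this
        rw [show ((0 : Nat) : Int) - 0 = 0 from by ring, show (c : Int) - 0 = (c : Int) from by ring]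
        exact hm
      · intro ⟨h, _, _⟩; omega
    · rw [if_neg hm]
      constructor
      · omega
      · intro ⟨h, _, hall⟩
        have := hall 0 le_rfl (by omega)
        rw [show ((0 : Nat) : Int) - 0 = 0 from by ring, show (c : Int) - 0 = (c : Int) from by ring] at this
        exact absurd this hm
  | succ r ih =>
    cases c with
    | zero =>
      unfold pvDS
      by_cases hm : (pvCell e ((r : Int) + 1) 0 == j) = true
      · rw [if_pos hm]
        constructor
        · intro h
          refine ⟨by push_cast; omega, by omega, fun i h0 hn => ?_⟩
          have : i = 0 := by omega
          subst this
          rw [show ((r + 1 : Nat) : Int) - 0 = (r : Int) + 1 from by push_cast; ring,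
            show ((0 : Nat) : Int) - 0 = 0 from by ring]
          exact hm
        · intro ⟨_, h, _⟩; omega
      · rw [if_neg hm]
        constructor
        · omega
        · intro ⟨_, h, hall⟩
          have := hall 0 le_rfl (by omega)
          rw [show ((r + 1 : Nat) : Int) - 0 = (r : Int) + 1 from by push_cast; ring,
            show ((0 : Nat) : Int) - 0 = 0 from by ring] at this
          exact absurd this hm
    | succ c =>
      unfold pvDS
      by_cases hm : (pvCell e ((r : Int) + 1) ((c : Int) + 1) == j) = true
      · rw [if_pos hm]
        by_cases hn1 : n = 1
        · subst hn1
          have := pvDS_nonneg e j r c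
          constructor
          · intro _
            refine ⟨by push_cast; omega, by push_cast; omega, fun i h0 hn => ?_⟩
            have : i = 0 := by omega
            subst this
            rw [show ((r + 1 : Nat) : Int) - 0 = (r : Int) + 1 from by push_cast; ring,
              show ((c + 1 : Nat) : Int) - 0 = (c : Int) + 1 from by push_cast; ring]
            exact hm
          · intro _; omega
        · have h2 : 1 ≤ n - 1 := by omega
          have hiff := ih c (n - 1) h2
          constructor
          · intro h
            have hrec : n - 1 ≤ pvDS e j r c := by omega
            obtain ⟨hb1, hb2, hall⟩ := hiff.1 hrec
            refine ⟨by push_cast; omega, by push_cast; omega, fun i h0 hn => ?_⟩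
            by_cases hi0 : i = 0
            · subst hi0
              rw [show ((r + 1 : Nat) : Int) - 0 = (r : Int) + 1 from by push_cast; ring,
                show ((c + 1 : Nat) : Int) - 0 = (c : Int) + 1 from by push_cast; ring]
              exact hm
            · rw [show ((r + 1 : Nat) : Int) - i = (r : Int) - (i - 1) from by push_cast; ring,
                show ((c + 1 : Nat) : Int) - i = (c : Int) - (i - 1) from by push_cast; ring]
              exact hall (i - 1) (by omega) (by omega)
          · intro ⟨hb1, hb2, hall⟩
            have : n - 1 ≤ pvDS e j r c := by
              apply hiff.2
              refine ⟨by push_cast at hb1 ⊢; omega, by push_cast at hb2 ⊢; omega, fun i h0 hn => ?_⟩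
              have := hall (i + 1) (by omega) (by omega)
              rw [show ((r + 1 : Nat) : Int) - (i + 1) = (r : Int) - i from by push_cast; ring,
                show ((c + 1 : Nat) : Int) - (i + 1) = (c : Int) - i from by push_cast; ring] at this
              exact this
            omega
      · rw [if_neg hm]
        constructor
        · omega
        · intro ⟨_, _, hall⟩
          have := hall 0 le_rfl (by omega)
          rw [show ((r + 1 : Nat) : Int) - 0 = (r : Int) + 1 from by push_cast; ring,
            show ((c + 1 : Nat) : Int) - 0 = (c : Int) + 1 from by push_cast; ring] at this
          exact absurd this hm

lemma pvAS_ge (e : List Int) (j : Int) (r c : Nat) (n : Int) (h1 : 1 ≤ n) (h5 : r ≤ 5) :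
    n ≤ pvAS e j r c ↔
      (n ≤ (c : Int) + 1 ∧ n ≤ 6 - (r : Int) ∧
        ∀ i : Int, 0 ≤ i → i < n → (pvCell e ((r : Int) + i) ((c : Int) - i) == j) = true) := by
  induction c generalizing r n with
  | zero =>
    unfold pvAS
    by_cases hm : (pvCell e (r : Int) 0 == j) = true
    · rw [if_pos hm]
      constructor
      · intro h
        refine ⟨by omega, by omega, fun i h0 hn => ?_⟩
        have : i = 0 := by omega
        subst this
        rw [show (r : Int) + 0 = (r : Int) from by ring, show ((0 : Nat) : Int) - 0 = 0 from by ring]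
        exact hm
      · intro ⟨h, _, _⟩; omega
    · rw [if_neg hm]
      constructor
      · omega
      · intro ⟨_, _, hall⟩
        have := hall 0 le_rfl (by omega)
        rw [show (r : Int) + 0 = (r : Int) from by ring, show ((0 : Nat) : Int) - 0 = 0 from by ring] at this
        exact absurd this hm
  | succ c ih =>
    unfold pvAS
    by_cases hm : (pvCell e (r : Int) ((c : Int) + 1) == j) = true
    · rw [if_pos hm]
      by_cases hr5 : 5 ≤ r
      · rw [if_pos hr5]
        have hr : r = 5 := by omega
        subst hr
        constructor
        · intro h
          refine ⟨by push_cast; omega, by push_cast; omega, fun i h0 hn => ?_⟩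
          have : i = 0 := by omega
          subst this
          rw [show ((5 : Nat) : Int) + 0 = ((5 : Nat) : Int) from by ring,
            show ((c + 1 : Nat) : Int) - 0 = (c : Int) + 1 from by push_cast; ring]
          exact hm
        · intro ⟨_, h, _⟩
          push_cast at h
          omega
      · rw [if_neg hr5]
        by_cases hn1 : n = 1
        · subst hn1
          have := pvAS_nonneg e j (r + 1) c
          constructor
          · intro _
            refine ⟨by push_cast; omega, by omega, fun i h0 hn => ?_⟩
            have : i = 0 := by omega
            subst this
            rw [show (r : Int) + 0 = (r : Int) from by ring,
              show ((c + 1 : Nat) : Int) - 0 = (c : Int) + 1 from by push_cast; ring]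
            exact hm
          · intro _; omega
        · have h2 : 1 ≤ n - 1 := by omega
          have hiff := ih (r + 1) (n - 1) h2 (by omega)
          constructor
          · intro h
            have hrec : n - 1 ≤ pvAS e j (r + 1) c := by omega
            obtain ⟨hb1, hb2, hall⟩ := hiff.1 hrec
            refine ⟨by push_cast; omega, by push_cast at hb2 ⊢; omega, fun i h0 hn => ?_⟩
            by_cases hi0 : i = 0
            · subst hi0
              rw [show (r : Int) + 0 = (r : Int) from by ring,
                show ((c + 1 : Nat) : Int) - 0 = (c : Int) + 1 from by push_cast; ring]
              exact hm
            · rw [show (r : Int) + i = ((r + 1 : Nat) : Int) + (i - 1) from by push_cast; ring,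
                show ((c + 1 : Nat) : Int) - i = (c : Int) - (i - 1) from by push_cast; ring]
              exact hall (i - 1) (by omega) (by omega)
          · intro ⟨hb1, hb2, hall⟩
            have : n - 1 ≤ pvAS e j (r + 1) c := by
              apply hiff.2
              refine ⟨by push_cast at hb1 ⊢; omega, by push_cast at hb2 ⊢; omega, fun i h0 hn => ?_⟩
              have := hall (i + 1) (by omega) (by omega)
              rw [show (r : Int) + (i + 1) = ((r + 1 : Nat) : Int) + i from by push_cast; ring,
                show ((c + 1 : Nat) : Int) - (i + 1) = (c : Int) - i from by push_cast; ring] at this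
              exact this
            omega
    · rw [if_neg hm]
      constructor
      · omega
      · intro ⟨_, _, hall⟩
        have := hall 0 le_rfl (by omega)
        rw [show (r : Int) + 0 = (r : Int) from by ring,
          show ((c + 1 : Nat) : Int) - 0 = (c : Int) + 1 from by push_cast; ring] at this
        exact absurd this hm

-- lookups into the port's row lists
lemma pvFilas_get (estado : List Int) (r c : Int) (hr0 : 0 ≤ r) (hr6 : r < 6) (hc0 : 0 ≤ c) (hc7 : c < 7) :
    PySem.List.pyGetD (PySem.List.pyGetD (pvFilas estado) r []) c 0 = pvCell estado r c := by
  unfold pvFilas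
  rw [PySem.List.pyGetD_map_pyRange_of_nonneg _ _ _ _ hr0 hr6,
    PySem.List.pyGetD_map_pyRange_of_nonneg _ _ _ _ hc0 hc7]
  rfl

lemma pvZ_get (c : Int) (h0 : 0 ≤ c) (h7 : c < 7) : PySem.List.pyGetD pvZ c 0 = 0 := by
  unfold pvZ
  rw [PySem.List.pyGetD_eq_getElem _ _ h0 (by simpa using h7)]
  simp only [List.getElem_replicate]

lemma pvMapRangeGet {α : Type} (g : Nat → α) (d : α) (k m : Nat) (h : k < m) :
    PySem.List.pyGetD ((List.range m).map g) (k : Int) d = g k := by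
  rw [PySem.List.pyGetD_natCast]
  simp [List.getD_eq_getElem?_getD, List.getElem?_map, h]

lemma pvHS_zero (e : List Int) (j : Int) (r : Nat) : pvHS e j r 0 = if pvCell e (r : Int) 0 == j then 1 else 0 := rfl
lemma pvHS_succ (e : List Int) (j : Int) (r c : Nat) :
    pvHS e j r (c + 1) = if pvCell e (r : Int) ((c : Int) + 1) == j then pvHS e j r c + 1 else 0 := rfl
lemma pvVS_zero (e : List Int) (j : Int) (c : Nat) : pvVS e j c 0 = if pvCell e 0 (c : Int) == j then 1 else 0 := rfl
lemma pvVS_succ (e : List Int) (j : Int) (c r : Nat) :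
    pvVS e j c (r + 1) = if pvCell e ((r : Int) + 1) (c : Int) == j then pvVS e j c r + 1 else 0 := rfl
lemma pvDS_zero (e : List Int) (j : Int) (c : Nat) : pvDS e j 0 c = if pvCell e 0 (c : Int) == j then 1 else 0 := rfl
lemma pvDS_succ_zero (e : List Int) (j : Int) (r : Nat) :
    pvDS e j (r + 1) 0 = if pvCell e ((r : Int) + 1) 0 == j then 1 else 0 := rfl
lemma pvDS_succ_succ (e : List Int) (j : Int) (r c : Nat) :
    pvDS e j (r + 1) (c + 1) = if pvCell e ((r : Int) + 1) ((c : Int) + 1) == j then pvDS e j r c + 1 else 0 := rfl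
lemma pvAS_zero (e : List Int) (j : Int) (r : Nat) : pvAS e j r 0 = if pvCell e (r : Int) 0 == j then 1 else 0 := rfl
lemma pvAS_succ (e : List Int) (j : Int) (r c : Nat) :
    pvAS e j r (c + 1) = if pvCell e (r : Int) ((c : Int) + 1) == j then
      (if 5 ≤ r then 0 else pvAS e j (r + 1) c) + 1 else 0 := rfl

lemma pvInner3 (estado : List Int) (jugador : Int) (r : Nat) (hr : r < 6) (pa pd : List Int)
    (hpa : ∀ c : Nat, c < 7 → PySem.List.pyGetD pa (c : Int) 0
      = (if r = 0 then 0 else pvVS estado jugador c (r - 1)))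
    (hpd : ∀ c : Nat, c < 7 → PySem.List.pyGetD pd (c : Int) 0
      = (if r = 0 then 0 else pvDS estado jugador (r - 1) c))
    (m : Nat) (hm : m ≤ 7) :
    (PySem.List.pyRange 0 (m : Int) 1).foldl
      (fun (t : List Int × List Int × List Int) c =>
        if PySem.List.pyGetD (PySem.List.pyGetD (pvFilas estado) (r : Int) []) c 0 == jugador then
          (t.1 ++ [(if 0 < c then PySem.List.pyGetD t.1 (c - 1) 0 else 0) + 1],
           t.2.1 ++ [PySem.List.pyGetD pa c 0 + 1],
           t.2.2 ++ [(if 0 < c && 0 < (r : Int) then PySem.List.pyGetD pd (c - 1) 0 else 0) + 1])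
        else (t.1 ++ [0], t.2.1 ++ [0], t.2.2 ++ [0])) ([], [], [])
    = ((List.range m).map (fun c => pvHS estado jugador r c),
       (List.range m).map (fun c => pvVS estado jugador c r),
       (List.range m).map (fun c => pvDS estado jugador r c)) := by
  induction m with
  | zero =>
    rw [show ((0 : Nat) : Int) = 0 from rfl, PySem.List.pyRange_one_eq_nil le_rfl]
    simp
  | succ m ih =>
    rw [show ((m + 1 : Nat) : Int) = (m : Int) + 1 from by push_cast; ring,
      PySem.List.pyRange_one_succ_right (show (0:Int) ≤ (m:Int) by positivity), List.foldl_append,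
      ih (by omega), List.foldl_cons, List.foldl_nil]
    rw [pvFilas_get estado _ _ (by positivity) (by exact_mod_cast hr) (by positivity) (by exact_mod_cast (by omega : m < 7))]
    have hrng : ∀ g : Nat → Int, (List.range (m + 1)).map g = (List.range m).map g ++ [g m] := by
      intro g; rw [List.range_succ, List.map_append]; rfl
    by_cases hmm : (pvCell estado (r : Int) (m : Int) == jugador) = true
    · rw [if_pos hmm]
      simp only [Prod.mk.injEq]
      refine ⟨?_, ?_, ?_⟩
      · rw [hrng]
        congr 1
        congr 1
        cases m with
        | zero =>
          push_cast at hmm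
          simp [pvHS_zero, hmm]
        | succ k =>
          push_cast at hmm ⊢
          rw [if_pos (show (0:Int) < (k : Int) + 1 from by positivity),
            show (k : Int) + 1 - 1 = (k : Int) from by ring, pvMapRangeGet _ _ k (k + 1) (by omega)]
          simp [pvHS_succ, hmm]
      · rw [hrng]
        congr 1
        congr 1
        rw [hpa m (by omega)]
        cases r with
        | zero =>
          push_cast at hmm
          simp [pvVS_zero, hmm]
        | succ k =>
          push_cast at hmm
          simp [pvVS_succ, hmm]
      · rw [hrng]
        congr 1
        congr 1
        cases m with
        | zero =>
          cases r with
          | zero =>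
            push_cast at hmm
            simp [pvDS_zero, hmm]
          | succ kr =>
            push_cast at hmm
            simp [pvDS_succ_zero, hmm]
        | succ km =>
          cases r with
          | zero =>
            push_cast at hmm
            simp [pvDS_zero, hmm]
          | succ kr =>
            push_cast at hmm ⊢
            rw [if_pos (show (decide ((0:Int) < (km : Int) + 1) && decide ((0:Int) < (kr : Int) + 1)) = true from by
                simp only [Bool.and_eq_true, decide_eq_true_eq]
                constructor <;> positivity),
              show (km : Int) + 1 - 1 = (km : Int) from by ring, hpd km (by omega)]
            simp [pvDS_succ_succ, hmm]
    · rw [if_neg hmm]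
      simp only [Prod.mk.injEq]
      refine ⟨?_, ?_, ?_⟩
      · rw [hrng]
        congr 1
        congr 1
        cases m with
        | zero =>
          push_cast at hmm
          simp [pvHS_zero, hmm]
        | succ k =>
          push_cast at hmm
          simp [pvHS_succ, hmm]
      · rw [hrng]
        congr 1
        congr 1
        cases r with
        | zero =>
          push_cast at hmm
          simp [pvVS_zero, hmm]
        | succ k =>
          push_cast at hmm
          simp [pvVS_succ, hmm]
      · rw [hrng]
        congr 1
        congr 1
        cases m with
        | zero =>
          cases r with
          | zero =>
            push_cast at hmm
            simp [pvDS_zero, hmm]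
          | succ kr =>
            push_cast at hmm
            simp [pvDS_succ_zero, hmm]
        | succ km =>
          cases r with
          | zero =>
            push_cast at hmm
            simp [pvDS_zero, hmm]
          | succ kr =>
            push_cast at hmm
            simp [pvDS_succ_succ, hmm]

def pvRowH (e : List Int) (j : Int) (r : Nat) : List Int := (List.range 7).map (fun c => pvHS e j r c)
def pvRowV (e : List Int) (j : Int) (r : Nat) : List Int := (List.range 7).map (fun c => pvVS e j c r)
def pvRowD (e : List Int) (j : Int) (r : Nat) : List Int := (List.range 7).map (fun c => pvDS e j r c)
def pvRowA (e : List Int) (j : Int) (r : Nat) : List Int := (List.range 7).map (fun c => pvAS e j r c)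

lemma pvOuter3 (estado : List Int) (jugador : Int) (k : Nat) (hk : k ≤ 6) :
    (PySem.List.pyRange 0 (k : Int) 1).foldl
      (fun (st : List (List Int) × List (List Int) × List (List Int)) r =>
        let pa := if 0 < r then PySem.List.pyGetD st.2.1 (r - 1) [] else pvZ
        let pd := if 0 < r then PySem.List.pyGetD st.2.2 (r - 1) [] else pvZ
        let t := (PySem.List.pyRange 0 7 1).foldl
          (fun (t : List Int × List Int × List Int) c =>
            if PySem.List.pyGetD (PySem.List.pyGetD (pvFilas estado) r []) c 0 == jugador then
              (t.1 ++ [(if 0 < c then PySem.List.pyGetD t.1 (c - 1) 0 else 0) + 1],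
               t.2.1 ++ [PySem.List.pyGetD pa c 0 + 1],
               t.2.2 ++ [(if 0 < c && 0 < r then PySem.List.pyGetD pd (c - 1) 0 else 0) + 1])
            else (t.1 ++ [0], t.2.1 ++ [0], t.2.2 ++ [0])) ([], [], [])
        (st.1 ++ [t.1], st.2.1 ++ [t.2.1], st.2.2 ++ [t.2.2])) ([], [], [])
    = ((List.range k).map (pvRowH estado jugador),
       (List.range k).map (pvRowV estado jugador),
       (List.range k).map (pvRowD estado jugador)) := by
  induction k with
  | zero =>
    rw [show ((0 : Nat) : Int) = 0 from rfl, PySem.List.pyRange_one_eq_nil le_rfl]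
    simp
  | succ k ih =>
    rw [show ((k + 1 : Nat) : Int) = (k : Int) + 1 from by push_cast; ring,
      PySem.List.pyRange_one_succ_right (show (0:Int) ≤ (k:Int) by positivity), List.foldl_append,
      ih (by omega), List.foldl_cons, List.foldl_nil]
    simp only []
    have hpa : ∀ c : Nat, c < 7 →
        PySem.List.pyGetD (if 0 < (k : Int) then PySem.List.pyGetD ((List.range k).map (pvRowV estado jugador)) ((k : Int) - 1) [] else pvZ) (c : Int) 0
          = (if k = 0 then 0 else pvVS estado jugador c (k - 1)) := by
      intro c hc
      cases k with
      | zero => simp [pvZ_get (c : Int) (by positivity) (by exact_mod_cast hc)]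
      | succ kk =>
        rw [if_pos (by positivity), show ((kk + 1 : Nat) : Int) - 1 = ((kk : Nat) : Int) from by push_cast; ring,
          pvMapRangeGet _ _ kk (kk + 1) (by omega)]
        unfold pvRowV
        rw [pvMapRangeGet _ _ c 7 hc]
        simp
    have hpd : ∀ c : Nat, c < 7 →
        PySem.List.pyGetD (if 0 < (k : Int) then PySem.List.pyGetD ((List.range k).map (pvRowD estado jugador)) ((k : Int) - 1) [] else pvZ) (c : Int) 0
          = (if k = 0 then 0 else pvDS estado jugador (k - 1) c) := by
      intro c hc
      cases k with
      | zero => simp [pvZ_get (c : Int) (by positivity) (by exact_mod_cast hc)]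
      | succ kk =>
        rw [if_pos (by positivity), show ((kk + 1 : Nat) : Int) - 1 = ((kk : Nat) : Int) from by push_cast; ring,
          pvMapRangeGet _ _ kk (kk + 1) (by omega)]
        unfold pvRowD
        rw [pvMapRangeGet _ _ c 7 hc]
        simp
    have hinner := pvInner3 estado jugador k (by omega) _ _ hpa hpd 7 le_rfl
    rw [show ((7 : Nat) : Int) = (7 : Int) from by norm_num] at hinner
    rw [hinner]
    simp only [Prod.mk.injEq]
    refine ⟨?_, ?_, ?_⟩ <;>
      · conv_rhs => rw [List.range_succ, List.map_append]
        rfl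

lemma pvInnerA (estado : List Int) (jugador : Int) (r : Nat) (hr : r < 6) (nx : List Int)
    (hnx : ∀ c : Nat, c < 7 → PySem.List.pyGetD nx (c : Int) 0
      = (if r = 5 then 0 else pvAS estado jugador (r + 1) c))
    (m : Nat) (hm : m ≤ 7) :
    (PySem.List.pyRange 0 (m : Int) 1).foldl
      (fun (fs : List Int) c =>
        if PySem.List.pyGetD (PySem.List.pyGetD (pvFilas estado) (r : Int) []) c 0 == jugador then
          fs ++ [(if 0 < c && (r : Int) < 5 then PySem.List.pyGetD nx (c - 1) 0 else 0) + 1]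
        else fs ++ [0]) []
    = (List.range m).map (fun c => pvAS estado jugador r c) := by
  induction m with
  | zero =>
    rw [show ((0 : Nat) : Int) = 0 from rfl, PySem.List.pyRange_one_eq_nil le_rfl]
    simp
  | succ m ih =>
    rw [show ((m + 1 : Nat) : Int) = (m : Int) + 1 from by push_cast; ring,
      PySem.List.pyRange_one_succ_right (show (0:Int) ≤ (m:Int) by positivity), List.foldl_append,
      ih (by omega), List.foldl_cons, List.foldl_nil]
    rw [pvFilas_get estado _ _ (by positivity) (by exact_mod_cast hr) (by positivity) (by exact_mod_cast (by omega : m < 7))]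
    rw [List.range_succ, List.map_append]
    by_cases hmm : (pvCell estado (r : Int) (m : Int) == jugador) = true
    · rw [if_pos hmm]
      congr 1
      congr 1
      by_cases hr5 : r = 5
      · subst hr5
        have hg : (decide (0 < (m : Int)) && decide (((5 : Nat) : Int) < 5)) = false := by
          simp
        rw [hg]
        cases m with
        | zero =>
          push_cast at hmm
          simp [pvAS_zero, hmm]
        | succ k =>
          push_cast at hmm
          simp [pvAS_succ, hmm]
      · cases m with
        | zero =>
          push_cast at hmm
          simp [pvAS_zero, hmm]
        | succ k =>
          push_cast at hmm ⊢
          have hg : (decide ((0:Int) < (k : Int) + 1) && decide ((r : Int) < 5)) = true := by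
            simp only [Bool.and_eq_true, decide_eq_true_eq]
            refine ⟨by positivity, by exact_mod_cast (by omega : r < 5)⟩
          rw [hg, if_pos rfl, show (k : Int) + 1 - 1 = (k : Int) from by ring, hnx k (by omega), if_neg hr5]
          simp [pvAS_succ, hmm, show ¬ 5 ≤ r from by omega]
    · rw [if_neg hmm]
      congr 1
      congr 1
      cases m with
      | zero =>
        push_cast at hmm
        simp [pvAS_zero, hmm]
      | succ k =>
        push_cast at hmm
        simp [pvAS_succ, hmm]

lemma pvOuterA (estado : List Int) (jugador : Int) (r : Nat) (hr : r ≤ 5) :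
    ∀ acc : List (List Int),
    (PySem.List.pyRange (r : Int) (-1) (-1)).foldl
      (fun (st : List (List Int) × List Int) r =>
        let fs := (PySem.List.pyRange 0 7 1).foldl
          (fun (fs : List Int) c =>
            if PySem.List.pyGetD (PySem.List.pyGetD (pvFilas estado) r []) c 0 == jugador then
              fs ++ [(if 0 < c && r < 5 then PySem.List.pyGetD st.2 (c - 1) 0 else 0) + 1]
            else fs ++ [0]) []
        (PySem.List.insert st.1 0 fs, fs))
      (acc, if r = 5 then pvZ else pvRowA estado jugador (r + 1))
    = ((List.range (r + 1)).map (pvRowA estado jugador) ++ acc, pvRowA estado jugador 0) := by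
  induction r with
  | zero =>
    intro acc
    rw [show ((0 : Nat) : Int) = 0 from rfl, PySem.List.pyRange_neg_one_cons (by omega),
      show (0 : Int) - 1 = -1 from by ring, PySem.List.pyRange_neg_one_eq_nil le_rfl,
      List.foldl_cons, List.foldl_nil]
    simp only []
    have hnx : ∀ c : Nat, c < 7 → PySem.List.pyGetD (if (0:Nat) = 5 then pvZ else pvRowA estado jugador 1) (c : Int) 0
        = (if (0:Nat) = 5 then 0 else pvAS estado jugador 1 c) := by
      intro c hc
      rw [if_neg (by omega), if_neg (by omega)]
      unfold pvRowA
      exact pvMapRangeGet _ _ c 7 hc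
    have hin := pvInnerA estado jugador 0 (by omega) _ hnx 7 le_rfl
    rw [show ((7 : Nat) : Int) = (7 : Int) from by norm_num,
      show ((0 : Nat) : Int) = (0 : Int) from rfl] at hin
    rw [hin, PySem.List.insert_zero]
    simp [pvRowA]
  | succ r ih =>
    intro acc
    rw [show ((r + 1 : Nat) : Int) = (r : Int) + 1 from by push_cast; ring,
      PySem.List.pyRange_neg_one_cons (by omega),
      show (r : Int) + 1 - 1 = (r : Int) from by ring, List.foldl_cons]
    simp only []
    have hnx : ∀ c : Nat, c < 7 → PySem.List.pyGetD (if (r + 1 : Nat) = 5 then pvZ else pvRowA estado jugador (r + 1 + 1)) (c : Int) 0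
        = (if (r + 1 : Nat) = 5 then 0 else pvAS estado jugador (r + 1 + 1) c) := by
      intro c hc
      by_cases h5 : (r + 1 : Nat) = 5
      · rw [if_pos h5, if_pos h5]
        exact pvZ_get (c : Int) (by positivity) (by exact_mod_cast hc)
      · rw [if_neg h5, if_neg h5]
        unfold pvRowA
        exact pvMapRangeGet _ _ c 7 hc
    have hin := pvInnerA estado jugador (r + 1) (by omega) _ hnx 7 le_rfl
    rw [show ((7 : Nat) : Int) = (7 : Int) from by norm_num,
      show ((r + 1 : Nat) : Int) = (r : Int) + 1 from by push_cast; ring] at hin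
    rw [hin, PySem.List.insert_zero]
    have := ih (by omega) ((List.range 7).map (fun c => pvAS estado jugador (r + 1) c) :: acc)
    rw [if_neg (by omega)] at this
    rw [show pvRowA estado jugador (r + 1) = (List.range 7).map (fun c => pvAS estado jugador (r + 1) c) from rfl] at this
    rw [this]
    rw [List.range_succ (n := r + 1), List.map_append]
    simp [pvRowA]

lemma pvVacia_eq (estado : List Int) (r c : Int) :
    pvVacia (pvFilas estado) r c
      = (decide (0 ≤ r) && decide (r < 6) && decide (0 ≤ c) && decide (c < 7) && (pvCell estado r c == 0)) := by
  by_cases h1 : 0 ≤ r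
  · by_cases h2 : r < 6
    · by_cases h3 : 0 ≤ c
      · by_cases h4 : c < 7
        · unfold pvVacia
          rw [pvFilas_get estado r c h1 h2 h3 h4]
        · simp [pvVacia, h4]
      · simp [pvVacia, h3]
    · simp [pvVacia, h2]
  · simp [pvVacia, h1]

lemma pvTGet (f : Nat → Nat → Int) (r c : Int) (hr0 : 0 ≤ r) (hr6 : r < 6) (hc0 : 0 ≤ c) (hc7 : c < 7) :
    PySem.List.pyGetD (PySem.List.pyGetD ((List.range 6).map (fun rr => (List.range 7).map (fun cc => f rr cc))) r []) c 0
      = f r.toNat c.toNat := by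
  rw [PySem.List.pyGetD_eq_getElem _ _ hr0 (by simp; omega)]
  simp only [List.getElem_map, List.getElem_range]
  rw [PySem.List.pyGetD_eq_getElem _ _ hc0 (by simp; omega)]
  simp only [List.getElem_map, List.getElem_range]

lemma pvFourIf (x : Int) (b1 b2 b3 b4 : Bool) :
    (let c1 := if b1 then x + 1 else x
     let c2 := if b2 then c1 + 1 else c1
     let c3 := if b3 then c2 + 1 else c2
     if b4 then c3 + 1 else c3)
      = x + (pvI b1 + pvI b2 + pvI b3 + pvI b4) := by
  cases b1 <;> cases b2 <;> cases b3 <;> cases b4 <;> simp [pvI] <;> ring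

lemma pvAll_iff (p : Int → Bool) (n : Int) :
    ((PySem.List.pyRange 0 n 1).all p = true) ↔ (∀ i : Int, 0 ≤ i → i < n → p i = true) := by
  rw [List.all_eq_true]
  constructor
  · intro h i h0 hn
    exact h i (PySem.List.mem_pyRange_one.2 ⟨h0, hn⟩)
  · intro h i hi
    have := PySem.List.mem_pyRange_one.1 hi
    exact h i this.1 this.2

-- end-cell indicators (B's counting conditions, after table lookup)
def pvEndH (e : List Int) (j n r c : Int) : Bool :=
  decide (pvHS e j r.toNat c.toNat ≥ n)
    && (decide (4 ≤ n) || pvVacia (pvFilas e) r (c - n) || pvVacia (pvFilas e) r (c + 1))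
def pvEndV (e : List Int) (j n r c : Int) : Bool :=
  decide (pvVS e j c.toNat r.toNat ≥ n)
    && (decide (4 ≤ n) || pvVacia (pvFilas e) (r - n) c)
def pvEndA (e : List Int) (j n r c : Int) : Bool :=
  decide (pvAS e j r.toNat c.toNat ≥ n)
    && (decide (4 ≤ n) || pvVacia (pvFilas e) (r + n) (c - n) || pvVacia (pvFilas e) (r - 1) (c + 1))
def pvEndD (e : List Int) (j n r c : Int) : Bool :=
  decide (pvDS e j r.toNat c.toNat ≥ n)
    && (decide (4 ≤ n) || pvVacia (pvFilas e) (r - n) (c - n) || pvVacia (pvFilas e) (r + 1) (c + 1))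

lemma pvB_decomp (estado : List Int) (jugador n : Int) (h7 : ¬ 7 < n) :
    contar_conectados_alt estado jugador n
      = pvS 0 6 (fun r => pvS 0 7 (fun c =>
          pvI (pvEndH estado jugador n r c) + pvI (pvEndV estado jugador n r c)
            + pvI (pvEndA estado jugador n r c) + pvI (pvEndD estado jugador n r c))) := by
  have h3 := pvOuter3 estado jugador 6 (by omega)
  rw [show ((6 : Nat) : Int) = (6 : Int) from by norm_num] at h3
  have hA := pvOuterA estado jugador 5 le_rfl []
  rw [if_pos rfl, show ((5 : Nat) : Int) = (5 : Int) from by norm_num, List.append_nil] at hA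
  unfold contar_conectados_alt
  rw [if_neg h7]
  simp only []
  rw [h3, hA]
  rw [PySem.List.foldl_congr_mem' _ _
    (fun cuenta r => cuenta + pvS 0 7 (fun c =>
      pvI (pvEndH estado jugador n r c) + pvI (pvEndV estado jugador n r c)
        + pvI (pvEndA estado jugador n r c) + pvI (pvEndD estado jugador n r c))) 0 ?_]
  · rw [PySem.List.foldl_add]
    unfold pvS
    rw [zero_add]
  · intro r hrm cuenta
    have hr := PySem.List.mem_pyRange_one.1 hrm
    rw [PySem.List.foldl_congr_mem' _ _
      (fun cuenta c => cuenta +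
        (pvI (pvEndH estado jugador n r c) + pvI (pvEndV estado jugador n r c)
          + pvI (pvEndA estado jugador n r c) + pvI (pvEndD estado jugador n r c))) cuenta ?_]
    · rw [PySem.List.foldl_add]
      rfl
    · intro c hcm cuenta
      have hc := PySem.List.mem_pyRange_one.1 hcm
      have g1 : PySem.List.pyGetD (PySem.List.pyGetD ((List.range 6).map (pvRowH estado jugador)) r []) c 0
          = pvHS estado jugador r.toNat c.toNat := by
        rw [show (List.range 6).map (pvRowH estado jugador)
          = (List.range 6).map (fun rr => (List.range 7).map (fun cc => pvHS estado jugador rr cc)) from rfl]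
        exact pvTGet _ r c hr.1 hr.2 hc.1 hc.2
      have g2 : PySem.List.pyGetD (PySem.List.pyGetD ((List.range 6).map (pvRowV estado jugador)) r []) c 0
          = pvVS estado jugador c.toNat r.toNat := by
        rw [show (List.range 6).map (pvRowV estado jugador)
          = (List.range 6).map (fun rr => (List.range 7).map (fun cc => pvVS estado jugador cc rr)) from rfl]
        exact pvTGet _ r c hr.1 hr.2 hc.1 hc.2
      have g3 : PySem.List.pyGetD (PySem.List.pyGetD ((List.range 6).map (pvRowA estado jugador)) r []) c 0
          = pvAS estado jugador r.toNat c.toNat := by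
        rw [show (List.range 6).map (pvRowA estado jugador)
          = (List.range 6).map (fun rr => (List.range 7).map (fun cc => pvAS estado jugador rr cc)) from rfl]
        exact pvTGet _ r c hr.1 hr.2 hc.1 hc.2
      have g4 : PySem.List.pyGetD (PySem.List.pyGetD ((List.range 6).map (pvRowD estado jugador)) r []) c 0
          = pvDS estado jugador r.toNat c.toNat := by
        rw [show (List.range 6).map (pvRowD estado jugador)
          = (List.range 6).map (fun rr => (List.range 7).map (fun cc => pvDS estado jugador rr cc)) from rfl]
        exact pvTGet _ r c hr.1 hr.2 hc.1 hc.2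
      show (let c1 := if (PySem.List.pyGetD (PySem.List.pyGetD ((List.range 6).map (pvRowH estado jugador)) r []) c 0 ≥ n
              && (decide (4 ≤ n) || pvVacia (pvFilas estado) r (c - n) || pvVacia (pvFilas estado) r (c + 1))) then cuenta + 1 else cuenta
            let c2 := if (PySem.List.pyGetD (PySem.List.pyGetD ((List.range 6).map (pvRowV estado jugador)) r []) c 0 ≥ n
              && (decide (4 ≤ n) || pvVacia (pvFilas estado) (r - n) c)) then c1 + 1 else c1
            let c3 := if (PySem.List.pyGetD (PySem.List.pyGetD ((List.range 6).map (pvRowA estado jugador)) r []) c 0 ≥ n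
              && (decide (4 ≤ n) || pvVacia (pvFilas estado) (r + n) (c - n) || pvVacia (pvFilas estado) (r - 1) (c + 1))) then c2 + 1 else c2
            if (PySem.List.pyGetD (PySem.List.pyGetD ((List.range 6).map (pvRowD estado jugador)) r []) c 0 ≥ n
              && (decide (4 ≤ n) || pvVacia (pvFilas estado) (r - n) (c - n) || pvVacia (pvFilas estado) (r + 1) (c + 1))) then c3 + 1 else c3)
          = cuenta + (pvI (pvEndH estado jugador n r c) + pvI (pvEndV estado jugador n r c)
              + pvI (pvEndA estado jugador n r c) + pvI (pvEndD estado jugador n r c))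
      rw [g1, g2, g3, g4]
      rw [show (pvI (pvEndH estado jugador n r c) + pvI (pvEndV estado jugador n r c)
              + pvI (pvEndA estado jugador n r c) + pvI (pvEndD estado jugador n r c))
        = (pvI (pvEndH estado jugador n r c) + (pvI (pvEndV estado jugador n r c)
              + (pvI (pvEndA estado jugador n r c) + pvI (pvEndD estado jugador n r c)))) from by ring]
      unfold pvEndH pvEndV pvEndA pvEndD
      have := pvFourIf cuenta
        (decide (pvHS estado jugador r.toNat c.toNat ≥ n)
          && (decide (4 ≤ n) || pvVacia (pvFilas estado) r (c - n) || pvVacia (pvFilas estado) r (c + 1)))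
        (decide (pvVS estado jugador c.toNat r.toNat ≥ n)
          && (decide (4 ≤ n) || pvVacia (pvFilas estado) (r - n) c))
        (decide (pvAS estado jugador r.toNat c.toNat ≥ n)
          && (decide (4 ≤ n) || pvVacia (pvFilas estado) (r + n) (c - n) || pvVacia (pvFilas estado) (r - 1) (c + 1)))
        (decide (pvDS estado jugador r.toNat c.toNat ≥ n)
          && (decide (4 ≤ n) || pvVacia (pvFilas estado) (r - n) (c - n) || pvVacia (pvFilas estado) (r + 1) (c + 1)))
      rw [this]
      ring

lemma pvSplit4 (g1 g2 g3 g4 : Int → Int → Int) :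
    pvS 0 6 (fun r => pvS 0 7 (fun c => g1 r c + g2 r c + g3 r c + g4 r c))
      = pvS 0 6 (fun r => pvS 0 7 (fun c => g1 r c)) + pvS 0 6 (fun r => pvS 0 7 (fun c => g2 r c))
        + pvS 0 6 (fun r => pvS 0 7 (fun c => g3 r c)) + pvS 0 6 (fun r => pvS 0 7 (fun c => g4 r c)) := by
  have hin : ∀ r : Int, pvS 0 7 (fun c => g1 r c + g2 r c + g3 r c + g4 r c)
      = pvS 0 7 (fun c => g1 r c) + pvS 0 7 (fun c => g2 r c) + pvS 0 7 (fun c => g3 r c) + pvS 0 7 (fun c => g4 r c) := by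
    intro r
    rw [pvS_add 0 7 (fun c => g1 r c + g2 r c + g3 r c) (fun c => g4 r c),
      pvS_add 0 7 (fun c => g1 r c + g2 r c) (fun c => g3 r c),
      pvS_add 0 7 (fun c => g1 r c) (fun c => g2 r c)]
  rw [pvS_congr (fun r _ _ => hin r),
    pvS_add 0 6 (fun r => pvS 0 7 (fun c => g1 r c) + pvS 0 7 (fun c => g2 r c) + pvS 0 7 (fun c => g3 r c)) (fun r => pvS 0 7 (fun c => g4 r c)),
    pvS_add 0 6 (fun r => pvS 0 7 (fun c => g1 r c) + pvS 0 7 (fun c => g2 r c)) (fun r => pvS 0 7 (fun c => g3 r c)),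
    pvS_add 0 6 (fun r => pvS 0 7 (fun c => g1 r c)) (fun r => pvS 0 7 (fun c => g2 r c))]

lemma pvPtH (e : List Int) (j n r c : Int) (h1 : 1 ≤ n) (hr0 : 0 ≤ r) (hr6 : r < 6) (hc0 : 0 ≤ c) (hc7 : c < 7) :
    pvEndH e j n r c = pvGoodH e j n r (c - (n - 1)) := by
  apply Bool.coe_iff_coe.mp
  unfold pvEndH pvGoodH
  rw [pvVacia_eq, pvVacia_eq]
  have hge : (n ≤ pvHS e j r.toNat c.toNat) ↔
      (n ≤ c + 1 ∧ ∀ i : Int, 0 ≤ i → i < n → (pvCell e r (c - i) == j) = true) := by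
    have := pvHS_ge e j r.toNat c.toNat n h1
    rw [Int.toNat_of_nonneg hr0, Int.toNat_of_nonneg hc0] at this
    exact this
  unfold pvLineH pvOpenH
  simp only [ge_iff_le, Bool.and_eq_true, Bool.or_eq_true, decide_eq_true_eq, hge, pvAll_iff]
  constructor
  · rintro ⟨⟨hb, hall⟩, hdisj⟩
    refine ⟨⟨⟨⟨by omega, by omega⟩, by omega⟩, by omega⟩, ?_, ?_⟩
    · intro i h0 hn
      rw [show c - (n - 1) + i = c - (n - 1 - i) from by ring]
      exact hall (n - 1 - i) (by omega) (by omega)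
    · rcases hdisj with (h4 | hv1) | hv2
      · exact Or.inl h4
      · obtain ⟨⟨⟨⟨ha1, ha2⟩, ha3⟩, ha4⟩, hcell⟩ := hv1
        refine Or.inr (Or.inl ⟨by omega, ?_⟩)
        rw [show c - (n - 1) - 1 = c - n from by ring]
        exact hcell
      · obtain ⟨⟨⟨⟨ha1, ha2⟩, ha3⟩, ha4⟩, hcell⟩ := hv2
        refine Or.inr (Or.inr ⟨by omega, ?_⟩)
        rw [show c - (n - 1) + n = c + 1 from by ring]
        exact hcell
  · rintro ⟨⟨⟨⟨_, _⟩, hcn⟩, _⟩, hall, hdisj⟩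
    refine ⟨⟨by omega, ?_⟩, ?_⟩
    · intro i h0 hn
      rw [show c - i = c - (n - 1) + (n - 1 - i) from by ring]
      exact hall (n - 1 - i) (by omega) (by omega)
    · rcases hdisj with h4 | ⟨hpos, hcell⟩ | ⟨hlt, hcell⟩
      · exact Or.inl (Or.inl h4)
      · refine Or.inl (Or.inr ⟨⟨⟨⟨by omega, by omega⟩, by omega⟩, by omega⟩, ?_⟩)
        rw [show c - n = c - (n - 1) - 1 from by ring]
        exact hcell
      · refine Or.inr ⟨⟨⟨⟨by omega, by omega⟩, by omega⟩, by omega⟩, ?_⟩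
        rw [show c + 1 = c - (n - 1) + n from by ring]
        exact hcell

lemma pvDirH (e : List Int) (j n : Int) (h1 : 1 ≤ n) :
    pvS 0 6 (fun r => pvS 0 7 (fun c => pvI (pvEndH e j n r c)))
      = pvS 0 6 (fun f => pvS 0 7 (fun c => pvI (pvGoodH e j n f c))) := by
  by_cases h7 : n ≤ 7
  · apply pvS_congr
    intro r hr0 hr6
    have hstep1 : pvS 0 7 (fun c => pvI (pvEndH e j n r c))
        = pvS 0 7 (fun c => pvI (pvGoodH e j n r (c - (n - 1)))) := by
      apply pvS_congr
      intro c hc0 hc7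
      rw [pvPtH e j n r c h1 hr0 hr6 hc0 hc7]
    rw [hstep1]
    have hs := pvS_shift (1 - n) (8 - n) (n - 1) (fun c => pvI (pvGoodH e j n r c))
    rw [show 1 - n + (n - 1) = (0:Int) from by ring, show 8 - n + (n - 1) = (7:Int) from by ring] at hs
    rw [hs, pvS_split (a := 1 - n) (m := 0) (b := 8 - n) _ (by omega) (by omega),
      pvS_split (a := 0) (m := 8 - n) (b := 7) (fun c => pvI (pvGoodH e j n r c)) (by omega) (by omega)]
    have hz1 : pvS (1 - n) 0 (fun c => pvI (pvGoodH e j n r c)) = 0 := by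
      apply pvS_zero
      intro c _ hcb
      have hd : decide (0 ≤ c) = false := decide_eq_false (by omega)
      simp [pvGoodH, pvI, hd]
    have hz2 : pvS (8 - n) 7 (fun c => pvI (pvGoodH e j n r c)) = 0 := by
      apply pvS_zero
      intro c hca _
      have hd : decide (c + n ≤ 7) = false := decide_eq_false (by omega)
      simp [pvGoodH, pvI, hd]
    omega
  · have hzl : pvS 0 6 (fun r => pvS 0 7 (fun c => pvI (pvEndH e j n r c))) = 0 := by
      apply pvS_zero
      intro r hr0 hr6
      apply pvS_zero
      intro c hc0 hc7
      have hd : decide (pvHS e j r.toNat c.toNat ≥ n) = false := by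
        apply decide_eq_false
        intro hge
        have := ((pvHS_ge e j r.toNat c.toNat n (by omega)).1 hge).1
        omega
      simp [pvEndH, pvI, hd]
    have hzr : pvS 0 6 (fun f => pvS 0 7 (fun c => pvI (pvGoodH e j n f c))) = 0 := by
      apply pvS_zero
      intro f _ _
      apply pvS_zero
      intro c hc0 _
      have hd : decide (c + n ≤ 7) = false := decide_eq_false (by omega)
      simp [pvGoodH, pvI, hd]
    omega

lemma pvPtV (e : List Int) (j n r c : Int) (h1 : 1 ≤ n) (hr0 : 0 ≤ r) (hr6 : r < 6) (hc0 : 0 ≤ c) (hc7 : c < 7) :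
    pvEndV e j n r c = pvGoodVB e j n (r - (n - 1)) c := by
  apply Bool.coe_iff_coe.mp
  unfold pvEndV pvGoodVB
  rw [pvVacia_eq]
  have hge : (n ≤ pvVS e j c.toNat r.toNat) ↔
      (n ≤ r + 1 ∧ ∀ i : Int, 0 ≤ i → i < n → (pvCell e (r - i) c == j) = true) := by
    have := pvVS_ge e j c.toNat r.toNat n h1
    rw [Int.toNat_of_nonneg hr0, Int.toNat_of_nonneg hc0] at this
    exact this
  unfold pvLineV pvOpenV
  simp only [ge_iff_le, Bool.and_eq_true, Bool.or_eq_true, decide_eq_true_eq, hge, pvAll_iff]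
  constructor
  · rintro ⟨⟨hb, hall⟩, hdisj⟩
    refine ⟨⟨⟨⟨by omega, by omega⟩, by omega⟩, by omega⟩, ?_, ?_⟩
    · intro i h0 hn
      rw [show r - (n - 1) + i = r - (n - 1 - i) from by ring]
      exact hall (n - 1 - i) (by omega) (by omega)
    · rcases hdisj with h4 | hv1
      · exact Or.inl h4
      · obtain ⟨⟨⟨⟨ha1, ha2⟩, ha3⟩, ha4⟩, hcell⟩ := hv1
        refine Or.inr ⟨by omega, ?_⟩
        rw [show r - (n - 1) - 1 = r - n from by ring]
        exact hcell
  · rintro ⟨⟨⟨⟨_, _⟩, hf0⟩, _⟩, hall, hdisj⟩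
    refine ⟨⟨by omega, ?_⟩, ?_⟩
    · intro i h0 hn
      rw [show r - i = r - (n - 1) + (n - 1 - i) from by ring]
      exact hall (n - 1 - i) (by omega) (by omega)
    · rcases hdisj with h4 | ⟨hpos, hcell⟩
      · exact Or.inl h4
      · refine Or.inr ⟨⟨⟨⟨by omega, by omega⟩, by omega⟩, by omega⟩, ?_⟩
        rw [show r - n = r - (n - 1) - 1 from by ring]
        exact hcell

lemma pvDirV (e : List Int) (j n : Int) (h1 : 1 ≤ n) :
    pvS 0 6 (fun r => pvS 0 7 (fun c => pvI (pvEndV e j n r c)))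
      = pvS 0 6 (fun f => pvS 0 7 (fun c => pvI (pvGoodVB e j n f c))) := by
  by_cases h7 : n ≤ 7
  · have hpt : pvS 0 6 (fun r => pvS 0 7 (fun c => pvI (pvEndV e j n r c)))
        = pvS 0 6 (fun r => pvS 0 7 (fun c => pvI (pvGoodVB e j n (r - (n - 1)) c))) := by
      apply pvS_congr
      intro r hr0 hr6
      apply pvS_congr
      intro c hc0 hc7
      rw [pvPtV e j n r c h1 hr0 hr6 hc0 hc7]
    rw [hpt]
    have hs := pvS_shift (1 - n) (7 - n) (n - 1) (fun f => pvS 0 7 (fun c => pvI (pvGoodVB e j n f c)))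
    rw [show 1 - n + (n - 1) = (0:Int) from by ring, show 7 - n + (n - 1) = (6:Int) from by ring] at hs
    rw [hs, pvS_split (a := 1 - n) (m := 0) (b := 7 - n) _ (by omega) (by omega),
      pvS_split (a := 0) (m := 7 - n) (b := 6) (fun f => pvS 0 7 (fun c => pvI (pvGoodVB e j n f c))) (by omega) (by omega)]
    have hz1 : pvS (1 - n) 0 (fun f => pvS 0 7 (fun c => pvI (pvGoodVB e j n f c))) = 0 := by
      apply pvS_zero
      intro f _ hf
      apply pvS_zero
      intro c _ _
      have hd : decide (0 ≤ f) = false := decide_eq_false (by omega)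
      simp [pvGoodVB, pvI, hd]
    have hz2 : pvS (7 - n) 6 (fun f => pvS 0 7 (fun c => pvI (pvGoodVB e j n f c))) = 0 := by
      apply pvS_zero
      intro f hf _
      apply pvS_zero
      intro c _ _
      have hd : decide (f + n ≤ 6) = false := decide_eq_false (by omega)
      simp [pvGoodVB, pvI, hd]
    omega
  · have hzl : pvS 0 6 (fun r => pvS 0 7 (fun c => pvI (pvEndV e j n r c))) = 0 := by
      apply pvS_zero
      intro r hr0 hr6
      apply pvS_zero
      intro c hc0 hc7
      have hd : decide (pvVS e j c.toNat r.toNat ≥ n) = false := by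
        apply decide_eq_false
        intro hge
        have := ((pvVS_ge e j c.toNat r.toNat n (by omega)).1 hge).1
        omega
      simp [pvEndV, pvI, hd]
    have hzr : pvS 0 6 (fun f => pvS 0 7 (fun c => pvI (pvGoodVB e j n f c))) = 0 := by
      apply pvS_zero
      intro f hf0 _
      apply pvS_zero
      intro c _ _
      have hd : decide (f + n ≤ 6) = false := decide_eq_false (by omega)
      simp [pvGoodVB, pvI, hd]
    omega

lemma pvPtA (e : List Int) (j n r c : Int) (h1 : 1 ≤ n) (hr0 : 0 ≤ r) (hr6 : r < 6) (hc0 : 0 ≤ c) (hc7 : c < 7) :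
    pvEndA e j n r c = pvGoodA e j n (r - (1 - n)) (c - (n - 1)) := by
  apply Bool.coe_iff_coe.mp
  unfold pvEndA pvGoodA
  rw [pvVacia_eq, pvVacia_eq]
  have hge : (n ≤ pvAS e j r.toNat c.toNat) ↔
      (n ≤ c + 1 ∧ n ≤ 6 - r ∧ ∀ i : Int, 0 ≤ i → i < n → (pvCell e (r + i) (c - i) == j) = true) := by
    have := pvAS_ge e j r.toNat c.toNat n h1 (by omega)
    rw [Int.toNat_of_nonneg hr0, Int.toNat_of_nonneg hc0] at this
    exact this
  unfold pvLineA pvOpenA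
  simp only [ge_iff_le, Bool.and_eq_true, Bool.or_eq_true, decide_eq_true_eq, hge, pvAll_iff]
  constructor
  · rintro ⟨⟨hb1, hb2, hall⟩, hdisj⟩
    refine ⟨⟨⟨⟨by omega, by omega⟩, by omega⟩, by omega⟩, ?_, ?_⟩
    · intro i h0 hn
      rw [show r - (1 - n) - i = r + (n - 1 - i) from by ring,
        show c - (n - 1) + i = c - (n - 1 - i) from by ring]
      exact hall (n - 1 - i) (by omega) (by omega)
    · rcases hdisj with (h4 | hv1) | hv2
      · exact Or.inl h4
      · obtain ⟨⟨⟨⟨ha1, ha2⟩, ha3⟩, ha4⟩, hcell⟩ := hv1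
        refine Or.inr (Or.inl ⟨⟨by omega, by omega⟩, ?_⟩)
        rw [show r - (1 - n) + 1 = r + n from by ring, show c - (n - 1) - 1 = c - n from by ring]
        exact hcell
      · obtain ⟨⟨⟨⟨ha1, ha2⟩, ha3⟩, ha4⟩, hcell⟩ := hv2
        refine Or.inr (Or.inr ⟨⟨by omega, by omega⟩, ?_⟩)
        rw [show r - (1 - n) - n = r - 1 from by ring, show c - (n - 1) + n = c + 1 from by ring]
        exact hcell
  · rintro ⟨⟨⟨⟨_, hf6⟩, hcp⟩, _⟩, hall, hdisj⟩
    refine ⟨⟨by omega, by omega, ?_⟩, ?_⟩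
    · intro i h0 hn
      rw [show r + i = r - (1 - n) - (n - 1 - i) from by ring,
        show c - i = c - (n - 1) + (n - 1 - i) from by ring]
      exact hall (n - 1 - i) (by omega) (by omega)
    · rcases hdisj with h4 | ⟨⟨hp1, hp2⟩, hcell⟩ | ⟨⟨hp1, hp2⟩, hcell⟩
      · exact Or.inl (Or.inl h4)
      · refine Or.inl (Or.inr ⟨⟨⟨⟨by omega, by omega⟩, by omega⟩, by omega⟩, ?_⟩)
        rw [show r + n = r - (1 - n) + 1 from by ring, show c - n = c - (n - 1) - 1 from by ring]
        exact hcell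
      · refine Or.inr ⟨⟨⟨⟨by omega, by omega⟩, by omega⟩, by omega⟩, ?_⟩
        rw [show r - 1 = r - (1 - n) - n from by ring, show c + 1 = c - (n - 1) + n from by ring]
        exact hcell

lemma pvDirA (e : List Int) (j n : Int) (h1 : 1 ≤ n) :
    pvS 0 6 (fun r => pvS 0 7 (fun c => pvI (pvEndA e j n r c)))
      = pvS 0 6 (fun f => pvS 0 7 (fun c => pvI (pvGoodA e j n f c))) := by
  by_cases h7 : n ≤ 7
  · have hpt : pvS 0 6 (fun r => pvS 0 7 (fun c => pvI (pvEndA e j n r c)))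
        = pvS 0 6 (fun r => pvS 0 7 (fun c => pvI (pvGoodA e j n (r - (1 - n)) c))) := by
      apply pvS_congr
      intro r hr0 hr6
      have hstep1 : pvS 0 7 (fun c => pvI (pvEndA e j n r c))
          = pvS 0 7 (fun c => pvI (pvGoodA e j n (r - (1 - n)) (c - (n - 1)))) := by
        apply pvS_congr
        intro c hc0 hc7
        rw [pvPtA e j n r c h1 hr0 hr6 hc0 hc7]
      rw [hstep1]
      have hs := pvS_shift (1 - n) (8 - n) (n - 1) (fun c => pvI (pvGoodA e j n (r - (1 - n)) c))
      rw [show 1 - n + (n - 1) = (0:Int) from by ring, show 8 - n + (n - 1) = (7:Int) from by ring] at hs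
      rw [hs, pvS_split (a := 1 - n) (m := 0) (b := 8 - n) _ (by omega) (by omega),
        pvS_split (a := 0) (m := 8 - n) (b := 7) (fun c => pvI (pvGoodA e j n (r - (1 - n)) c)) (by omega) (by omega)]
      have hz1 : pvS (1 - n) 0 (fun c => pvI (pvGoodA e j n (r - (1 - n)) c)) = 0 := by
        apply pvS_zero
        intro c _ hcb
        have hd : decide (0 ≤ c) = false := decide_eq_false (by omega)
        simp [pvGoodA, pvI, hd]
      have hz2 : pvS (8 - n) 7 (fun c => pvI (pvGoodA e j n (r - (1 - n)) c)) = 0 := by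
        apply pvS_zero
        intro c hca _
        have hd : decide (c + n ≤ 7) = false := decide_eq_false (by omega)
        simp [pvGoodA, pvI, hd]
      omega
    rw [hpt]
    have hs2 := pvS_shift (n - 1) (n + 5) (1 - n) (fun f => pvS 0 7 (fun c => pvI (pvGoodA e j n f c)))
    rw [show n - 1 + (1 - n) = (0:Int) from by ring, show n + 5 + (1 - n) = (6:Int) from by ring] at hs2
    rw [hs2, pvS_split (a := n - 1) (m := 6) (b := n + 5) _ (by omega) (by omega),
      pvS_split (a := 0) (m := n - 1) (b := 6) (fun f => pvS 0 7 (fun c => pvI (pvGoodA e j n f c))) (by omega) (by omega)]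
    have hz1 : pvS 6 (n + 5) (fun f => pvS 0 7 (fun c => pvI (pvGoodA e j n f c))) = 0 := by
      apply pvS_zero
      intro f hf _
      apply pvS_zero
      intro c _ _
      have hd : decide (f < 6) = false := decide_eq_false (by omega)
      simp [pvGoodA, pvI, hd]
    have hz2 : pvS 0 (n - 1) (fun f => pvS 0 7 (fun c => pvI (pvGoodA e j n f c))) = 0 := by
      apply pvS_zero
      intro f _ hf
      apply pvS_zero
      intro c _ _
      have hg : pvGoodA e j n f c = false := by
        unfold pvGoodA
        rw [show decide (n - 1 ≤ f) = false from decide_eq_false (by omega)]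
        simp
      simp [hg, pvI]
    omega
  · have hzl : pvS 0 6 (fun r => pvS 0 7 (fun c => pvI (pvEndA e j n r c))) = 0 := by
      apply pvS_zero
      intro r hr0 hr6
      apply pvS_zero
      intro c hc0 hc7
      have hd : decide (pvAS e j r.toNat c.toNat ≥ n) = false := by
        apply decide_eq_false
        intro hge
        have := ((pvAS_ge e j r.toNat c.toNat n (by omega) (by omega)).1 hge).1
        omega
      simp [pvEndA, pvI, hd]
    have hzr : pvS 0 6 (fun f => pvS 0 7 (fun c => pvI (pvGoodA e j n f c))) = 0 := by
      apply pvS_zero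
      intro f _ _
      apply pvS_zero
      intro c hc0 _
      have hd : decide (c + n ≤ 7) = false := decide_eq_false (by omega)
      simp [pvGoodA, pvI, hd]
    omega

lemma pvPtD (e : List Int) (j n r c : Int) (h1 : 1 ≤ n) (hr0 : 0 ≤ r) (hr6 : r < 6) (hc0 : 0 ≤ c) (hc7 : c < 7) :
    pvEndD e j n r c = pvGoodD e j n (r - (n - 1)) (c - (n - 1)) := by
  apply Bool.coe_iff_coe.mp
  unfold pvEndD pvGoodD
  rw [pvVacia_eq, pvVacia_eq]
  have hge : (n ≤ pvDS e j r.toNat c.toNat) ↔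
      (n ≤ r + 1 ∧ n ≤ c + 1 ∧ ∀ i : Int, 0 ≤ i → i < n → (pvCell e (r - i) (c - i) == j) = true) := by
    have := pvDS_ge e j r.toNat c.toNat n h1
    rw [Int.toNat_of_nonneg hr0, Int.toNat_of_nonneg hc0] at this
    exact this
  unfold pvLineD pvOpenD
  simp only [ge_iff_le, Bool.and_eq_true, Bool.or_eq_true, decide_eq_true_eq, hge, pvAll_iff]
  constructor
  · rintro ⟨⟨hb1, hb2, hall⟩, hdisj⟩
    refine ⟨⟨⟨⟨by omega, by omega⟩, by omega⟩, by omega⟩, ?_, ?_⟩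
    · intro i h0 hn
      rw [show r - (n - 1) + i = r - (n - 1 - i) from by ring,
        show c - (n - 1) + i = c - (n - 1 - i) from by ring]
      exact hall (n - 1 - i) (by omega) (by omega)
    · rcases hdisj with (h4 | hv1) | hv2
      · exact Or.inl h4
      · obtain ⟨⟨⟨⟨ha1, ha2⟩, ha3⟩, ha4⟩, hcell⟩ := hv1
        refine Or.inr (Or.inl ⟨⟨by omega, by omega⟩, ?_⟩)
        rw [show r - (n - 1) - 1 = r - n from by ring, show c - (n - 1) - 1 = c - n from by ring]
        exact hcell
      · obtain ⟨⟨⟨⟨ha1, ha2⟩, ha3⟩, ha4⟩, hcell⟩ := hv2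
        refine Or.inr (Or.inr ⟨⟨by omega, by omega⟩, ?_⟩)
        rw [show r - (n - 1) + n = r + 1 from by ring, show c - (n - 1) + n = c + 1 from by ring]
        exact hcell
  · rintro ⟨⟨⟨⟨hf0, _⟩, hcp⟩, _⟩, hall, hdisj⟩
    refine ⟨⟨by omega, by omega, ?_⟩, ?_⟩
    · intro i h0 hn
      rw [show r - i = r - (n - 1) + (n - 1 - i) from by ring,
        show c - i = c - (n - 1) + (n - 1 - i) from by ring]
      exact hall (n - 1 - i) (by omega) (by omega)
    · rcases hdisj with h4 | ⟨⟨hp1, hp2⟩, hcell⟩ | ⟨⟨hp1, hp2⟩, hcell⟩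
      · exact Or.inl (Or.inl h4)
      · refine Or.inl (Or.inr ⟨⟨⟨⟨by omega, by omega⟩, by omega⟩, by omega⟩, ?_⟩)
        rw [show r - n = r - (n - 1) - 1 from by ring, show c - n = c - (n - 1) - 1 from by ring]
        exact hcell
      · refine Or.inr ⟨⟨⟨⟨by omega, by omega⟩, by omega⟩, by omega⟩, ?_⟩
        rw [show r + 1 = r - (n - 1) + n from by ring, show c + 1 = c - (n - 1) + n from by ring]
        exact hcell

lemma pvDirD (e : List Int) (j n : Int) (h1 : 1 ≤ n) :
    pvS 0 6 (fun r => pvS 0 7 (fun c => pvI (pvEndD e j n r c)))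
      = pvS 0 6 (fun f => pvS 0 7 (fun c => pvI (pvGoodD e j n f c))) := by
  by_cases h7 : n ≤ 7
  · have hpt : pvS 0 6 (fun r => pvS 0 7 (fun c => pvI (pvEndD e j n r c)))
        = pvS 0 6 (fun r => pvS 0 7 (fun c => pvI (pvGoodD e j n (r - (n - 1)) c))) := by
      apply pvS_congr
      intro r hr0 hr6
      have hstep1 : pvS 0 7 (fun c => pvI (pvEndD e j n r c))
          = pvS 0 7 (fun c => pvI (pvGoodD e j n (r - (n - 1)) (c - (n - 1)))) := by
        apply pvS_congr
        intro c hc0 hc7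
        rw [pvPtD e j n r c h1 hr0 hr6 hc0 hc7]
      rw [hstep1]
      have hs := pvS_shift (1 - n) (8 - n) (n - 1) (fun c => pvI (pvGoodD e j n (r - (n - 1)) c))
      rw [show 1 - n + (n - 1) = (0:Int) from by ring, show 8 - n + (n - 1) = (7:Int) from by ring] at hs
      rw [hs, pvS_split (a := 1 - n) (m := 0) (b := 8 - n) _ (by omega) (by omega),
        pvS_split (a := 0) (m := 8 - n) (b := 7) (fun c => pvI (pvGoodD e j n (r - (n - 1)) c)) (by omega) (by omega)]
      have hz1 : pvS (1 - n) 0 (fun c => pvI (pvGoodD e j n (r - (n - 1)) c)) = 0 := by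
        apply pvS_zero
        intro c _ hcb
        have hd : decide (0 ≤ c) = false := decide_eq_false (by omega)
        simp [pvGoodD, pvI, hd]
      have hz2 : pvS (8 - n) 7 (fun c => pvI (pvGoodD e j n (r - (n - 1)) c)) = 0 := by
        apply pvS_zero
        intro c hca _
        have hd : decide (c + n ≤ 7) = false := decide_eq_false (by omega)
        simp [pvGoodD, pvI, hd]
      omega
    rw [hpt]
    have hs2 := pvS_shift (1 - n) (7 - n) (n - 1) (fun f => pvS 0 7 (fun c => pvI (pvGoodD e j n f c)))
    rw [show 1 - n + (n - 1) = (0:Int) from by ring, show 7 - n + (n - 1) = (6:Int) from by ring] at hs2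
    rw [hs2, pvS_split (a := 1 - n) (m := 0) (b := 7 - n) _ (by omega) (by omega),
      pvS_split (a := 0) (m := 7 - n) (b := 6) (fun f => pvS 0 7 (fun c => pvI (pvGoodD e j n f c))) (by omega) (by omega)]
    have hz1 : pvS (1 - n) 0 (fun f => pvS 0 7 (fun c => pvI (pvGoodD e j n f c))) = 0 := by
      apply pvS_zero
      intro f _ hf
      apply pvS_zero
      intro c _ _
      have hd : decide (0 ≤ f) = false := decide_eq_false (by omega)
      simp [pvGoodD, pvI, hd]
    have hz2 : pvS (7 - n) 6 (fun f => pvS 0 7 (fun c => pvI (pvGoodD e j n f c))) = 0 := by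
      apply pvS_zero
      intro f hf _
      apply pvS_zero
      intro c _ _
      have hd : decide (f + n ≤ 6) = false := decide_eq_false (by omega)
      simp [pvGoodD, pvI, hd]
    omega
  · have hzl : pvS 0 6 (fun r => pvS 0 7 (fun c => pvI (pvEndD e j n r c))) = 0 := by
      apply pvS_zero
      intro r hr0 hr6
      apply pvS_zero
      intro c hc0 hc7
      have hd : decide (pvDS e j r.toNat c.toNat ≥ n) = false := by
        apply decide_eq_false
        intro hge
        have := ((pvDS_ge e j r.toNat c.toNat n (by omega)).1 hge).1
        omega
      simp [pvEndD, pvI, hd]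
    have hzr : pvS 0 6 (fun f => pvS 0 7 (fun c => pvI (pvGoodD e j n f c))) = 0 := by
      apply pvS_zero
      intro f _ _
      apply pvS_zero
      intro c hc0 _
      have hd : decide (c + n ≤ 7) = false := decide_eq_false (by omega)
      simp [pvGoodD, pvI, hd]
    omega

lemma pvVAB_eq (e : List Int) (j n f c : Int) (h1 : 1 ≤ n) (h4 : n ≤ 4) :
    pvGoodVA e j n f c = pvGoodVB e j n f c := by
  unfold pvGoodVA pvGoodVB
  by_cases hn : n < 4
  · rw [show decide (n < 4) = true from decide_eq_true hn,
      show decide (n = 4) = false from decide_eq_false (by omega),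
      show decide (4 ≤ n) = false from decide_eq_false (by omega)]
    simp
  · rw [show decide (n < 4) = false from decide_eq_false hn,
      show decide (n = 4) = true from decide_eq_true (by omega),
      show decide (4 ≤ n) = true from decide_eq_true (by omega)]
    simp

lemma pvVA_zero (e : List Int) (j n : Int) (h5 : 5 ≤ n) :
    pvS 0 6 (fun f => pvS 0 7 (fun c => pvI (pvGoodVA e j n f c))) = 0 := by
  apply pvS_zero
  intro f _ _
  apply pvS_zero
  intro c _ _
  have hg : pvGoodVA e j n f c = false := by
    unfold pvGoodVA
    rw [show decide (n < 4) = false from decide_eq_false (by omega),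
      show decide (n = 4) = false from decide_eq_false (by omega)]
    simp
  simp [hg, pvI]

lemma pvVB_zero_big (e : List Int) (j n : Int) (h7 : 7 ≤ n) :
    pvS 0 6 (fun f => pvS 0 7 (fun c => pvI (pvGoodVB e j n f c))) = 0 := by
  apply pvS_zero
  intro f hf0 _
  apply pvS_zero
  intro c _ _
  have hd : decide (f + n ≤ 6) = false := decide_eq_false (by omega)
  simp [pvGoodVB, pvI, hd]

lemma pvVB_zero_noD (estado : List Int) (jugador n : Int) (h5 : 5 ≤ n) (h6 : n ≤ 6)
    (hnd : ¬ D_contar_conectados estado jugador n) :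
    pvS 0 6 (fun f => pvS 0 7 (fun c => pvI (pvGoodVB estado jugador n f c))) = 0 := by
  apply pvS_zero
  intro f hf0 hf6
  apply pvS_zero
  intro c hc0 hc7
  by_cases hg : pvGoodVB estado jugador n f c = true
  · exfalso
    apply hnd
    unfold pvGoodVB at hg
    simp only [Bool.and_eq_true] at hg
    obtain ⟨hfit, hline, _⟩ := hg
    simp only [decide_eq_true_eq] at hfit
    refine ⟨h5, h6, c, PySem.List.mem_pyRange_one.2 ⟨by omega, by omega⟩,
      f, PySem.List.mem_pyRange_one.2 ⟨by omega, by omega⟩, ?_⟩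
    intro i hi
    have hmem := PySem.List.mem_pyRange_one.1 hi
    have := (pvAll_iff (fun i => pvCell estado (f + i) c == jugador) n).1 hline i hmem.1 hmem.2
    unfold pvCell at this
    exact beq_iff_eq.1 this
  · rw [Bool.not_eq_true] at hg
    simp [hg, pvI]

lemma pvVB_one_D (estado : List Int) (jugador n : Int)
    (hD : D_contar_conectados estado jugador n) :
    1 ≤ pvS 0 6 (fun f => pvS 0 7 (fun c => pvI (pvGoodVB estado jugador n f c))) := by
  obtain ⟨h5, h6, c, hcmem, f, hfmem, hall⟩ := hD
  have hc := PySem.List.mem_pyRange_one.1 hcmem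
  have hf := PySem.List.mem_pyRange_one.1 hfmem
  have hg : pvGoodVB estado jugador n f c = true := by
    unfold pvGoodVB
    simp only [Bool.and_eq_true]
    refine ⟨by simp only [decide_eq_true_eq]; omega, ?_, ?_⟩
    · apply (pvAll_iff (fun i => pvCell estado (f + i) c == jugador) n).2
      intro i h0 hn
      have := hall i (PySem.List.mem_pyRange_one.2 ⟨h0, hn⟩)
      unfold pvCell
      exact beq_iff_eq.2 this
    · rw [Bool.or_eq_true]
      exact Or.inl (decide_eq_true (by omega))
  apply pvS_pos (x0 := f)
  · intro x _ _
    apply pvS_nonneg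
    intro y _ _
    exact pvI_nonneg _
  · omega
  · omega
  · apply pvS_pos (x0 := c)
    · intro y _ _
      exact pvI_nonneg _
    · omega
    · omega
    · rw [hg]
      simp [pvI]

lemma pvA_zero_big (estado : List Int) (jugador n : Int) (h8 : 8 ≤ n) :
    contar_conectados estado jugador n = 0 := by
  rw [pvA_decomp estado jugador n (by omega)]
  have hH : pvS 0 6 (fun f => pvS 0 7 (fun c => pvI (pvGoodH estado jugador n f c))) = 0 := by
    apply pvS_zero; intro f _ _; apply pvS_zero; intro c hc0 _
    have hd : decide (c + n ≤ 7) = false := decide_eq_false (by omega)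
    simp [pvGoodH, pvI, hd]
  have hV : pvS 0 6 (fun f => pvS 0 7 (fun c => pvI (pvGoodVA estado jugador n f c))) = 0 :=
    by
      apply pvS_zero; intro f hf0 _; apply pvS_zero; intro c _ _
      have hd : decide (f + n ≤ 6) = false := decide_eq_false (by omega)
      simp [pvGoodVA, pvI, hd]
  have hA : pvS 0 6 (fun f => pvS 0 7 (fun c => pvI (pvGoodA estado jugador n f c))) = 0 := by
    apply pvS_zero; intro f _ _; apply pvS_zero; intro c hc0 _
    have hd : decide (c + n ≤ 7) = false := decide_eq_false (by omega)
    simp [pvGoodA, pvI, hd]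
  have hD : pvS 0 6 (fun f => pvS 0 7 (fun c => pvI (pvGoodD estado jugador n f c))) = 0 := by
    apply pvS_zero; intro f _ _; apply pvS_zero; intro c hc0 _
    have hd : decide (c + n ≤ 7) = false := decide_eq_false (by omega)
    simp [pvGoodD, pvI, hd]
  omega

lemma pvB_zero_big (estado : List Int) (jugador n : Int) (h8 : 8 ≤ n) :
    contar_conectados_alt estado jugador n = 0 := by
  unfold contar_conectados_alt
  rw [if_pos (by omega)]

lemma pvMainEq (estado : List Int) (jugador n : Int) (h1 : 1 ≤ n)
    (hVeq : pvS 0 6 (fun f => pvS 0 7 (fun c => pvI (pvGoodVA estado jugador n f c)))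
      = pvS 0 6 (fun f => pvS 0 7 (fun c => pvI (pvGoodVB estado jugador n f c)))) :
    contar_conectados estado jugador n = contar_conectados_alt estado jugador n := by
  by_cases h7 : 7 < n
  · rw [pvA_zero_big estado jugador n (by omega), pvB_zero_big estado jugador n (by omega)]
  rw [pvA_decomp estado jugador n h1, pvB_decomp estado jugador n h7, pvSplit4,
    pvDirH estado jugador n h1, pvDirV estado jugador n h1,
    pvDirA estado jugador n h1, pvDirD estado jugador n h1, hVeq]

-- ===== VERDICT (by name: the statement is the Claim_ definition above) =====
theorem contar_conectados_spec : Claim_unchanged_contar_conectados := by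
  intro estado jugador n _hdom hpre
  unfold Spec_contar_conectados
  intro hnd
  rcases hpre with ⟨_hlen, h1⟩ | h8
  case inr =>
    rw [pvA_zero_big estado jugador n h8, pvB_zero_big estado jugador n h8]
  apply pvMainEq estado jugador n h1
  by_cases h4 : n ≤ 4
  · apply pvS_congr
    intro f _ _
    apply pvS_congr
    intro c _ _
    rw [pvVAB_eq estado jugador n f c h1 h4]
  · rw [pvVA_zero estado jugador n (by omega)]
    by_cases h6 : n ≤ 6
    · rw [pvVB_zero_noD estado jugador n (by omega) h6 hnd]
    · rw [pvVB_zero_big estado jugador n (by omega)]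
theorem contar_conectados_changed : Claim_changed_contar_conectados := by
  unfold Claim_changed_contar_conectados; decide
theorem contar_conectados_tight : Claim_exact_contar_conectados := by
  intro estado jugador n _hdom hpre hD
  have h6 : n ≤ 6 := hD.2.1
  rcases hpre with ⟨_hlen, h1⟩ | h8
  case inr => exact absurd h8 (by omega)
  have h5 : 5 ≤ n := hD.1
  have hA := pvA_decomp estado jugador n h1
  have hB := pvB_decomp estado jugador n (by omega)
  rw [pvSplit4, pvDirH estado jugador n h1, pvDirV estado jugador n h1,
    pvDirA estado jugador n h1, pvDirD estado jugador n h1] at hB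
  rw [pvVA_zero estado jugador n h5] at hA
  have hone := pvVB_one_D estado jugador n hD
  omega
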